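-- pv_equiv track=rewrite | github.com/yoojt233/ForCT | Python/src/Programmers/연습문제/무인도여행/__init__.py | solution
-- ===== SOURCE A (Python) =====
-- from collections import deque
--
-- def solution(maps):
--     row = len(maps)
--     col = len(maps[0])
--     visited = [[False for _ in range(col)] for _ in range(row)]
--     res = []
--
--     for i in range(row):
--         for j in range(col):
--             if maps[i][j] == 'X' or visited[i][j]: continue
--             visited[i][j] = True
--             res.append(bfs(row, col, maps, visited, i, j, int(maps[i][j])))
--
--     return sorted(res) if res else [-1]
--
-- def bfs(row, col, maps, visited, i, j, cnt) -> int: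
--     q = deque([(i, j)])
--     dir = [(-1, 0), (1, 0), (0, -1), (0, 1)]
--
--     while q:
--         r, c = q.popleft()
--         for d in range(4):
--             dx, dy = dir[d]
--             nr, nc = r + dx, c + dy
--
--             if nr not in range(row) or nc not in range(col) or maps[nr][nc] == 'X' or visited[nr][nc]: continue
--             visited[nr][nc] = True
--             cnt += int(maps[nr][nc])
--             q.append((nr, nc))
--
--     return cnt
-- ===== SOURCE B (Python) =====
-- def solution(maps):
--     row, col = len(maps), len(maps[0])
--     n = row * col
--     parent = list(range(n))
--
--     def find(x):
--         while parent[x] != x: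
--             x = parent[x]
--         return x
--
--     def union(a, b):
--         ra, rb = find(a), find(b)
--         if ra == rb:
--             return
--         if ra < rb:
--             parent[rb] = ra
--         else:
--             parent[ra] = rb
--
--     for i in range(row):
--         for j in range(col):
--             if maps[i][j] == 'X':
--                 continue
--             idx = i * col + j
--             if j + 1 < col and maps[i][j + 1] != 'X':
--                 union(idx, idx + 1)
--             if i + 1 < row and maps[i + 1][j] != 'X':
--                 union(idx, idx + col)
--
--     sums = {}
--     for i in range(row):
--         for j in range(col):
--             if maps[i][j] == 'X':
--                 continue
--             r = find(i * col + j)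
--             sums[r] = sums.get(r, 0) + int(maps[i][j])
--
--     return sorted(sums.values()) if sums else [-1]
-- ===== Notes on version B (the rewrite author's own statement) =====
-- stated objective: alternative
-- what changed: Replaces BFS flood-fill (visited matrix + deque + per-seed traversal) by a union-find over flat cell indices: right/down neighbours of each non-X cell are unioned (root of larger index points to the smaller), then one scan groups the digit sums per root in a dict and the dict values are sorted; no queue, no visited grid, no per-component traversal.
import Mathlib
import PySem

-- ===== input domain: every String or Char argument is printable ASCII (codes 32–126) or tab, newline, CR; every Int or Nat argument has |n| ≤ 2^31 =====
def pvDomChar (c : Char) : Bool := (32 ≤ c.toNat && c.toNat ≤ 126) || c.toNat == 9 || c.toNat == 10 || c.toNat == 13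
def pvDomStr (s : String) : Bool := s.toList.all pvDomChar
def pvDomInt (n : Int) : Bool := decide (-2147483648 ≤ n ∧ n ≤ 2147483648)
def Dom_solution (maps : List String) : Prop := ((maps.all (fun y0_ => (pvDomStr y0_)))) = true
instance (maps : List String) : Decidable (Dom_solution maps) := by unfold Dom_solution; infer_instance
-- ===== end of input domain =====

-- B replaces A's BFS flood-fill (deque + visited matrix + per-seed traversal) by a union-find over
-- flat cell indices with a per-root digit-sum dict; same values, not claimed faster.

-- ===== PORT A =====
-- shared low-level cell accessors (maps[i][j] and int(maps[i][j]))
def pvCh (maps : List String) (i j : Int) : Char :=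
  (((PySem.List.pyGet? maps i).bind (fun s => PySem.Str.pyGet? s j)).getD 'X')

def pvDig (maps : List String) (i j : Int) : Int :=
  (PySem.Int.ofStr? (String.singleton (pvCh maps i j))).getD 0

-- visited[i][j] read / write (indices are guarded non-negative in-range wherever A uses them)
def pvVGet (v : List (List Bool)) (i j : Int) : Bool :=
  ((v.getD i.toNat []).getD j.toNat false)

def pvVSet (v : List (List Bool)) (i j : Int) : List (List Bool) :=
  v.set i.toNat ((v.getD i.toNat []).set j.toNat true)

-- one iteration of A's `for d in range(4)` body; state = (visited, cnt, queue-tail)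
def pvBfsDirStep (maps : List String) (row col r c : Int)
    (st : List (List Bool) × Int × List (Int × Int)) (d : Int × Int) :
    List (List Bool) × Int × List (Int × Int) :=
  let nr := r + d.1
  let nc := c + d.2
  if (0 ≤ nr ∧ nr < row) ∧ (0 ≤ nc ∧ nc < col) ∧ pvCh maps nr nc ≠ 'X' ∧ pvVGet st.1 nr nc = false
  then (pvVSet st.1 nr nc, st.2.1 + pvDig maps nr nc, st.2.2 ++ [(nr, nc)])
  else st

-- A's `while q:` loop (fuel bounds the number of iterations; the caller passes enough)
def pvBfsGo (maps : List String) (row col : Int) :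
    Nat → List (Int × Int) → List (List Bool) → Int → List (List Bool) × Int
  | 0, _, v, cnt => (v, cnt)
  | _ + 1, [], v, cnt => (v, cnt)
  | fuel + 1, (r, c) :: q, v, cnt =>
      let st := [((-1 : Int), (0 : Int)), (1, 0), (0, -1), (0, 1)].foldl
        (pvBfsDirStep maps row col r c) (v, cnt, q)
      pvBfsGo maps row col fuel st.2.2 st.1 st.2.1

def solution (maps : List String) : List Int :=
  match maps.head? with
  | none => []   -- Python raises IndexError on []; excluded by Pre_solution
  | some s0 =>
    let row : Int := maps.length
    let col : Int := PySem.Str.len s0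
    let fuel : Nat := (row * col + 1).toNat
    let init : List (List Bool) := List.replicate maps.length (List.replicate col.toNat false)
    let fin := (PySem.List.pyRange 0 row 1).foldl (fun st i =>
      (PySem.List.pyRange 0 col 1).foldl (fun (st : List (List Bool) × List Int) j =>
        if pvCh maps i j = 'X' ∨ pvVGet st.1 i j = true then st
        else
          let v1 := pvVSet st.1 i j
          let r := pvBfsGo maps row col fuel [(i, j)] v1 (pvDig maps i j)
          (r.1, st.2 ++ [r.2])) st) (init, [])
    if fin.2 = [] then [-1] else PySem.List.sorted fin.2 (fun x => x) false

-- ===== PORT B =====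
-- B's inner `find`: while parent[x] != x: x = parent[x].  Ported with fuel = len(parent),
-- always sufficient because every parent entry is ≤ its index (roots point down).
def pvFind (parent : List Nat) : Nat → Nat → Nat
  | 0, x => x
  | fuel + 1, x =>
      let px := parent.getD x x
      if px = x then x else pvFind parent fuel px

-- B's `union`: roots of a and b; the larger root is pointed at the smaller
def pvUnion (p : List Nat) (a b : Nat) : List Nat :=
  let ra := pvFind p p.length a
  let rb := pvFind p p.length b
  if ra = rb then p
  else if ra < rb then p.set rb ra
  else p.set ra rb

-- B's first double loop: union every non-X cell with its right and down non-X neighbour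
def pvUnionScan (maps : List String) (row colN : Nat) (p0 : List Nat) : List Nat :=
  (List.range row).foldl (fun p (i : Nat) =>
    (List.range colN).foldl (fun (p : List Nat) (j : Nat) =>
      if pvCh maps i j = 'X' then p
      else
        let idx : Nat := i * colN + j
        let p1 := if j + 1 < colN ∧ pvCh maps i (j + 1) ≠ 'X' then pvUnion p idx (idx + 1) else p
        if i + 1 < row ∧ pvCh maps (i + 1) j ≠ 'X' then pvUnion p1 idx (idx + colN) else p1) p) p0

-- B's second double loop: per-root digit sums in a dict
def pvSumScan (maps : List String) (row colN : Nat) (pf : List Nat) : PySem.Dict Nat Int :=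
  (List.range row).foldl (fun d (i : Nat) =>
    (List.range colN).foldl (fun (d : PySem.Dict Nat Int) (j : Nat) =>
      if pvCh maps i j = 'X' then d
      else
        let r := pvFind pf pf.length (i * colN + j)
        d.insert r (d.getD r 0 + pvDig maps i j)) d) PySem.Dict.empty

def solution_alt (maps : List String) : List Int :=
  match maps.head? with
  | none => []   -- Python raises IndexError on []; excluded by Pre_solution
  | some s0 =>
    let row : Nat := maps.length
    let colN : Nat := (PySem.Str.len s0).toNat   -- len(maps[0]) ≥ 0
    let n : Nat := row * colN
    let pf := pvUnionScan maps row colN (List.range n)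
    let d := pvSumScan maps row colN pf
    if d.size = 0 then [-1] else PySem.List.sorted d.values (fun x => x) false

-- ===== PRECONDITION & SPEC =====
-- Pre_ excludes exactly the inputs on which A raises: the empty list (IndexError on maps[0]),
-- a row shorter than the first row (IndexError), and a scanned cell that is neither 'X' nor a
-- digit (ValueError from int()).  On every such input A raises, so nothing A returns is excluded.
def Pre_solution (maps : List String) : Prop :=
  maps ≠ [] ∧ (maps.all (fun s =>
    decide ((PySem.Str.len (maps.headD "")).toNat ≤ s.toList.length) &&
    (s.toList.take (PySem.Str.len (maps.headD "")).toNat).all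
      (fun ch => ch == 'X' || (decide (48 ≤ ch.toNat) && decide (ch.toNat ≤ 57))))) = true
instance (maps : List String) : Decidable (Pre_solution maps) := by
  unfold Pre_solution; infer_instance

def pvWitness_solution : List String := ["19X", "X2X"]

def Spec_solution (maps : List String) (out : List Int) : Prop := out = solution_alt maps
instance (maps : List String) (out : List Int) : Decidable (Spec_solution maps out) := by
  unfold Spec_solution; infer_instance

-- ===== CLAIM (what is proved, stated in full; the proofs are below) =====
def Claim_equal_solution : Prop :=
  ∀ (maps : List String), Dom_solution maps → Pre_solution maps →
    Spec_solution maps (solution maps)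

-- ===== LEMMAS AND PROOFS =====

-- ---------- proof-side abbreviations and A-side infrastructure ----------
def pvColI (maps : List String) : Int := PySem.Str.len (maps.headD "")

def pvInGrid (maps : List String) (p : Int × Int) : Prop :=
  0 ≤ p.1 ∧ p.1 < (maps.length : Int) ∧ 0 ≤ p.2 ∧ p.2 < pvColI maps

def pvOpen (maps : List String) (p : Int × Int) : Prop :=
  pvInGrid maps p ∧ pvCh maps p.1 p.2 ≠ 'X'

def pvDval (maps : List String) (p : Int × Int) : Int := pvDig maps p.1 p.2

def pvNbrs (p : Int × Int) : List (Int × Int) :=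
  [(p.1 - 1, p.2), (p.1 + 1, p.2), (p.1, p.2 - 1), (p.1, p.2 + 1)]

-- the cells newly reachable from seed list S through cells not already in V
inductive pvNw (maps : List String) (V : Int × Int → Prop) (S : List (Int × Int)) :
    Int × Int → Prop
  | seed (x y : Int × Int) (hx : x ∈ S) (hy : y ∈ pvNbrs x)
      (ho : pvOpen maps y) (hv : ¬ V y) : pvNw maps V S y
  | step (z y : Int × Int) (hz : pvNw maps V S z) (hy : y ∈ pvNbrs z)
      (ho : pvOpen maps y) (hv : ¬ V y) : pvNw maps V S y

-- A's visited matrix as a predicate, and its well-formedness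
def pvVA (maps : List String) (v : List (List Bool)) (p : Int × Int) : Prop :=
  pvInGrid maps p ∧ pvVGet v p.1 p.2 = true

def pvDims (maps : List String) (v : List (List Bool)) : Prop :=
  v.length = maps.length ∧ ∀ r ∈ v, r.length = (pvColI maps).toNat

def pvFalseCount (v : List (List Bool)) : Nat := (v.map (fun r => r.count false)).sum

-- count of `false` drops by one when a false entry is set to true
theorem pvCountSetTrue : ∀ (r : List Bool) (j : Nat), j < r.length → r.getD j false = false →
    (r.set j true).count false + 1 = r.count false
  | b :: t, 0, _, hb => by
      simp [List.getD] at hb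
      subst hb
      simp
  | b :: t, j + 1, hj, hb => by
      have := pvCountSetTrue t j (by simpa using hj) (by simpa [List.getD] using hb)
      simp only [List.set_cons_succ, List.count_cons]
      omega

-- visited-matrix read/write facts (all indices inside the grid)
theorem pvGetDSetSelf {α : Type} (v : List α) (n : Nat) (a d : α) (h : n < v.length) :
    (v.set n a).getD n d = a := by
  rw [List.getD_eq_getElem?_getD, List.getElem?_set_self h, Option.getD_some]

theorem pvGetDSetNe {α : Type} (v : List α) (n m : Nat) (a d : α) (h : n ≠ m) :
    (v.set n a).getD m d = v.getD m d := by
  rw [List.getD_eq_getElem?_getD, List.getElem?_set_ne h, ← List.getD_eq_getElem?_getD]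

theorem pvRowLen (maps : List String) (v : List (List Bool)) (hd : pvDims maps v)
    (n : Nat) (hn : n < v.length) : (v.getD n []).length = (pvColI maps).toNat := by
  rw [List.getD_eq_getElem v [] hn]
  exact hd.2 _ (List.getElem_mem hn)

theorem pvVGet_set_self (maps : List String) (v : List (List Bool)) (i j : Int)
    (hd : pvDims maps v) (hij : pvInGrid maps (i, j)) :
    pvVGet (pvVSet v i j) i j = true := by
  obtain ⟨h1, h2, h3, h4⟩ : 0 ≤ i ∧ i < (maps.length : Int) ∧ 0 ≤ j ∧ j < pvColI maps := hij
  have hlen : v.length = maps.length := hd.1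
  have hi : i.toNat < v.length := by omega
  have hj : j.toNat < (v.getD i.toNat []).length := by
    rw [pvRowLen maps v hd _ hi]; omega
  unfold pvVGet pvVSet
  rw [pvGetDSetSelf v i.toNat _ [] hi, pvGetDSetSelf _ j.toNat _ false hj]

theorem pvVGet_set_ne (maps : List String) (v : List (List Bool)) (i j a b : Int)
    (hd : pvDims maps v) (hij : pvInGrid maps (i, j)) (hab : pvInGrid maps (a, b))
    (hne : (a, b) ≠ (i, j)) :
    pvVGet (pvVSet v i j) a b = pvVGet v a b := by
  obtain ⟨h1, h2, h3, h4⟩ : 0 ≤ i ∧ i < (maps.length : Int) ∧ 0 ≤ j ∧ j < pvColI maps := hij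
  obtain ⟨g1, g2, g3, g4⟩ : 0 ≤ a ∧ a < (maps.length : Int) ∧ 0 ≤ b ∧ b < pvColI maps := hab
  have hlen : v.length = maps.length := hd.1
  have hi : i.toNat < v.length := by omega
  by_cases hai : a.toNat = i.toNat
  · have hia : a = i := by omega
    have hbj : b ≠ j := by
      intro hbj; exact hne (by rw [hia, hbj])
    unfold pvVGet pvVSet
    rw [hai, pvGetDSetSelf v i.toNat _ [] hi,
      pvGetDSetNe _ j.toNat b.toNat _ false (by omega)]
  · unfold pvVGet pvVSet
    rw [pvGetDSetNe v i.toNat a.toNat _ [] (by omega)]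

theorem pvDims_set (maps : List String) (v : List (List Bool)) (i j : Int)
    (hd : pvDims maps v) (hij : pvInGrid maps (i, j)) :
    pvDims maps (pvVSet v i j) := by
  refine ⟨by simpa [pvVSet] using hd.1, ?_⟩
  intro r hr
  rcases List.mem_or_eq_of_mem_set hr with hr | rfl
  · exact hd.2 r hr
  · obtain ⟨h1, h2, h3, h4⟩ : 0 ≤ i ∧ i < (maps.length : Int) ∧ 0 ≤ j ∧ j < pvColI maps := hij
    have hlen : v.length = maps.length := hd.1
    have hi : i.toNat < v.length := by omega
    rw [List.length_set]
    exact pvRowLen maps v hd _ hi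

theorem pvVA_set (maps : List String) (v : List (List Bool)) (i j : Int)
    (hd : pvDims maps v) (hij : pvInGrid maps (i, j)) :
    ∀ p, pvVA maps (pvVSet v i j) p ↔ pvVA maps v p ∨ p = (i, j) := by
  rintro ⟨a, b⟩
  by_cases hp : (a, b) = (i, j)
  · rw [hp]
    simp only [pvVA, pvVGet_set_self maps v i j hd hij]
    tauto
  · by_cases hg : pvInGrid maps (a, b)
    · simp only [pvVA, pvVGet_set_ne maps v i j a b hd hij hg hp]
      tauto
    · simp only [pvVA]
      tauto

theorem pvFalse_set (maps : List String) (v : List (List Bool)) (i j : Int)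
    (hd : pvDims maps v) (hij : pvInGrid maps (i, j)) (hf : pvVGet v i j = false) :
    pvFalseCount (pvVSet v i j) + 1 = pvFalseCount v := by
  obtain ⟨h1, h2, h3, h4⟩ : 0 ≤ i ∧ i < (maps.length : Int) ∧ 0 ≤ j ∧ j < pvColI maps := hij
  have hlen : v.length = maps.length := hd.1
  have hi : i.toNat < v.length := by omega
  have hj : j.toNat < (v.getD i.toNat []).length := by
    rw [pvRowLen maps v hd _ hi]; omega
  have hcnt := pvCountSetTrue (v.getD i.toNat []) j.toNat hj hf
  unfold pvFalseCount pvVSet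
  rw [List.map_set, List.sum_set]
  have hmlen : i.toNat < (v.map (fun r => r.count false)).length := by
    simpa using hi
  have hsplit : (v.map (fun r => r.count false)).sum
      = ((v.map (fun r => r.count false)).take i.toNat).sum
        + ((v.map (fun r => r.count false)).drop i.toNat).sum := by
    rw [List.sum_take_add_sum_drop]
  have hdrop : (v.map (fun r => r.count false)).drop i.toNat
      = (v.map (fun r => r.count false))[i.toNat] :: (v.map (fun r => r.count false)).drop (i.toNat + 1) :=
    List.drop_eq_getElem_cons hmlen
  have hgm : (v.map (fun r => r.count false))[i.toNat] = (v.getD i.toNat []).count false := by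
    rw [List.getElem_map, List.getD_eq_getElem v [] hi]
  rw [if_pos hmlen]
  rw [hsplit, hdrop, hgm, List.sum_cons]
  omega

theorem pvNw_not_nil {maps : List String} {V : Int × Int → Prop} {y : Int × Int}
    (h : pvNw maps V [] y) : False := by
  induction h with
  | seed x y hx _ _ _ => simp at hx
  | step z y _ _ _ _ ih => exact ih

theorem pvNw_notV {maps : List String} {V : Int × Int → Prop} {S : List (Int × Int)}
    {y : Int × Int} (h : pvNw maps V S y) : ¬ V y := by
  cases h with
  | seed x y hx hy ho hv => exact hv
  | step z y hz hy ho hv => exact hv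

theorem pvNw_congr {maps : List String} {V V' : Int × Int → Prop}
    {S S' : List (Int × Int)} (hV : ∀ z, V z ↔ V' z) (hS : ∀ a, a ∈ S ↔ a ∈ S')
    {y : Int × Int} (h : pvNw maps V S y) : pvNw maps V' S' y := by
  induction h with
  | seed x y hx hy ho hv =>
      exact pvNw.seed x y ((hS x).mp hx) hy ho (fun w => hv ((hV y).mpr w))
  | step z y hz hy ho hv ih =>
      exact pvNw.step z y ih hy ho (fun w => hv ((hV y).mpr w))

-- popping x from the worklist and marking its fresh open neighbours N
theorem pvNw_exchange {maps : List String} {V : Int × Int → Prop}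
    {N S S' : List (Int × Int)} {x : Int × Int}
    (hxS : x ∈ S)
    (hsub : ∀ a ∈ S', a ∈ S ∨ a ∈ N)
    (hsup : ∀ a ∈ S, a = x ∨ a ∈ S')
    (hNS' : ∀ a ∈ N, a ∈ S')
    (hN : ∀ y, y ∈ N ↔ y ∈ pvNbrs x ∧ pvOpen maps y ∧ ¬ V y) :
    ∀ y, pvNw maps V S y ↔ (y ∈ N ∨ pvNw maps (fun z => V z ∨ z ∈ N) S' y) := by
  intro y
  constructor
  · intro h
    induction h with
    | seed a y ha hy ho hv =>
        rcases hsup a ha with rfl | haS'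
        · exact Or.inl ((hN y).mpr ⟨hy, ho, hv⟩)
        · by_cases hyN : y ∈ N
          · exact Or.inl hyN
          · exact Or.inr (pvNw.seed a y haS' hy ho (by tauto))
    | step z y hz hy ho hv ih =>
        by_cases hyN : y ∈ N
        · exact Or.inl hyN
        · rcases ih with hzN | hz'
          · exact Or.inr (pvNw.seed z y (hNS' z hzN) hy ho (by tauto))
          · exact Or.inr (pvNw.step z y hz' hy ho (by tauto))
  · intro h
    rcases h with hyN | h
    · obtain ⟨hy, ho, hv⟩ := (hN y).mp hyN
      exact pvNw.seed x y hxS hy ho hv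
    · induction h with
      | seed a y ha hy ho hv =>
          rcases hsub a ha with haS | haN
          · exact pvNw.seed a y haS hy ho (fun w => hv (Or.inl w))
          · obtain ⟨hay, hao, hav⟩ := (hN a).mp haN
            exact pvNw.step a y (pvNw.seed x a hxS hay hao hav) hy ho
              (fun w => hv (Or.inl w))
      | step z y hz hy ho hv ih =>
          exact pvNw.step z y ih hy ho (fun w => hv (Or.inl w))

-- A's neighbour fold over any direction list with pairwise-distinct target cells
theorem pvFoldA_char (maps : List String) (r c : Int) :
    ∀ (ds : List (Int × Int)) (v : List (List Bool)) (cnt : Int) (q : List (Int × Int)),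
    pvDims maps v →
    (ds.map (fun d => (r + d.1, c + d.2))).Nodup →
    ∃ N : List (Int × Int),
      (∀ y, y ∈ N ↔ y ∈ ds.map (fun d => (r + d.1, c + d.2)) ∧ pvOpen maps y ∧ ¬ pvVA maps v y) ∧
      N.Nodup ∧
      (ds.foldl (pvBfsDirStep maps (maps.length : Int) (pvColI maps) r c) (v, cnt, q)).2.2 = q ++ N ∧
      (ds.foldl (pvBfsDirStep maps (maps.length : Int) (pvColI maps) r c) (v, cnt, q)).2.1
        = cnt + (N.map (pvDval maps)).sum ∧
      pvDims maps (ds.foldl (pvBfsDirStep maps (maps.length : Int) (pvColI maps) r c) (v, cnt, q)).1 ∧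
      (∀ p, pvVA maps (ds.foldl (pvBfsDirStep maps (maps.length : Int) (pvColI maps) r c) (v, cnt, q)).1 p
        ↔ pvVA maps v p ∨ p ∈ N) ∧
      pvFalseCount (ds.foldl (pvBfsDirStep maps (maps.length : Int) (pvColI maps) r c) (v, cnt, q)).1 + N.length
        = pvFalseCount v := by
  intro ds
  induction ds with
  | nil =>
      intro v cnt q hd _
      exact ⟨[], by simp, by simp, by simp, by simp, hd, by simp, by simp⟩
  | cons d ds ih =>
      intro v cnt q hd hnd
      obtain ⟨dx, dy⟩ := d
      rw [List.map_cons, List.nodup_cons] at hnd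
      obtain ⟨hcellnot, hnd'⟩ := hnd
      by_cases hcond : pvOpen maps (r + dx, c + dy) ∧ pvVGet v (r + dx) (c + dy) = false
      · have hgrid : pvInGrid maps (r + dx, c + dy) := hcond.1.1
        have hstep : pvBfsDirStep maps (maps.length : Int) (pvColI maps) r c (v, cnt, q) (dx, dy)
            = (pvVSet v (r + dx) (c + dy), cnt + pvDig maps (r + dx) (c + dy), q ++ [(r + dx, c + dy)]) := by
          simp only [pvBfsDirStep]
          rw [if_pos]
          obtain ⟨⟨⟨o1, o2, o3, o4⟩, o5⟩, o6⟩ := hcond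
          exact ⟨⟨o1, o2⟩, ⟨o3, o4⟩, o5, o6⟩
        have hd1 : pvDims maps (pvVSet v (r + dx) (c + dy)) :=
          pvDims_set maps v (r + dx) (c + dy) hd hgrid
        have hva1 := pvVA_set maps v (r + dx) (c + dy) hd hgrid
        have hfc1 := pvFalse_set maps v (r + dx) (c + dy) hd hgrid hcond.2
        obtain ⟨N', hmem', hnodup', hq', hcnt', hdims', hva', hfc'⟩ :=
          ih (pvVSet v (r + dx) (c + dy)) (cnt + pvDig maps (r + dx) (c + dy))
            (q ++ [(r + dx, c + dy)]) hd1 hnd'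
        have hnotVAcell : ¬ pvVA maps v (r + dx, c + dy) := by
          intro hva
          rw [hva.2] at hcond
          exact absurd hcond.2 (by simp)
        have hcellN' : (r + dx, c + dy) ∉ N' := by
          intro hmem
          have := ((hmem' _).mp hmem).2.2
          exact this ((hva1 _).mpr (Or.inr rfl))
        refine ⟨(r + dx, c + dy) :: N', ?_, ?_, ?_, ?_, ?_, ?_, ?_⟩
        · intro y
          have h1 := hmem' y
          have h2 := hva1 y
          rw [List.map_cons]
          constructor
          · intro hyN
            rcases List.mem_cons.mp hyN with rfl | hyN'
            · exact ⟨List.mem_cons_self .., hcond.1, hnotVAcell⟩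
            · obtain ⟨ha, hb, hc⟩ := h1.mp hyN'
              exact ⟨List.mem_cons_of_mem _ ha, hb, fun w => hc (h2.mpr (Or.inl w))⟩
          · rintro ⟨hmem, ho, hv⟩
            rcases List.mem_cons.mp hmem with rfl | hyds
            · exact List.mem_cons_self ..
            · refine List.mem_cons_of_mem _ (h1.mpr ⟨hyds, ho, ?_⟩)
              intro w
              rcases h2.mp w with w' | rfl
              · exact hv w'
              · exact hcellnot hyds
        · exact List.nodup_cons.mpr ⟨hcellN', hnodup'⟩
        · rw [List.foldl_cons, hstep, hq', List.append_assoc]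
          rfl
        · rw [List.foldl_cons, hstep, hcnt']
          simp [add_assoc, pvDval]
        · rw [List.foldl_cons, hstep]
          exact hdims'
        · intro p
          rw [List.foldl_cons, hstep]
          have := hva' p
          have h2 := hva1 p
          simp only [List.mem_cons]
          tauto
        · rw [List.foldl_cons, hstep, List.length_cons]
          omega
      · have hstep : pvBfsDirStep maps (maps.length : Int) (pvColI maps) r c (v, cnt, q) (dx, dy)
            = (v, cnt, q) := by
          simp only [pvBfsDirStep]
          rw [if_neg]
          intro ⟨⟨o1, o2⟩, ⟨o3, o4⟩, o5, o6⟩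
          exact hcond ⟨⟨⟨o1, o2, o3, o4⟩, o5⟩, o6⟩
        obtain ⟨N', hmem', hnodup', hq', hcnt', hdims', hva', hfc'⟩ := ih v cnt q hd hnd'
        have hcellout : ¬ (pvOpen maps (r + dx, c + dy) ∧ ¬ pvVA maps v (r + dx, c + dy)) := by
          rintro ⟨ho, hv⟩
          cases hvb : pvVGet v (r + dx) (c + dy) with
          | false => exact hcond ⟨ho, hvb⟩
          | true => exact hv ⟨ho.1, hvb⟩
        refine ⟨N', ?_, hnodup', ?_, ?_, ?_, ?_, ?_⟩
        · intro y
          have h1 := hmem' y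
          rw [List.map_cons]
          constructor
          · intro hyN
            obtain ⟨ha, hb, hc⟩ := h1.mp hyN
            exact ⟨List.mem_cons_of_mem _ ha, hb, hc⟩
          · rintro ⟨hmem, ho, hv⟩
            rcases List.mem_cons.mp hmem with rfl | hyds
            · exact absurd ⟨ho, hv⟩ hcellout
            · exact h1.mpr ⟨hyds, ho, hv⟩
        · rw [List.foldl_cons, hstep]; exact hq'
        · rw [List.foldl_cons, hstep]; exact hcnt'
        · rw [List.foldl_cons, hstep]; exact hdims'
        · rw [List.foldl_cons, hstep]; exact hva'
        · rw [List.foldl_cons, hstep]; exact hfc'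

-- the literal direction list of A targets exactly the neighbour cells
theorem pvDirsMap (r c : Int) :
    [((-1 : Int), (0 : Int)), (1, 0), (0, -1), (0, 1)].map (fun d => (r + d.1, c + d.2))
      = pvNbrs (r, c) := by
  simp only [List.map_cons, List.map_nil, pvNbrs]
  norm_num
  exact ⟨by ring, by ring⟩

theorem pvNbrsNodup (r c : Int) : (pvNbrs (r, c)).Nodup := by
  simp [pvNbrs, Prod.ext_iff]
  omega

-- A's while-loop: final visited = old ∪ newly-reachable, cnt grows by their digit sum
theorem pvBfsGo_char (maps : List String) :
    ∀ (fuel : Nat) (q : List (Int × Int)) (v : List (List Bool)) (cnt : Int),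
    pvDims maps v →
    (∀ p ∈ q, pvVA maps v p) →
    pvFalseCount v + q.length ≤ fuel →
    ∃ L : List (Int × Int), L.Nodup ∧
      (∀ y, y ∈ L ↔ pvNw maps (pvVA maps v) q y) ∧
      pvDims maps (pvBfsGo maps (maps.length : Int) (pvColI maps) fuel q v cnt).1 ∧
      (∀ p, pvVA maps (pvBfsGo maps (maps.length : Int) (pvColI maps) fuel q v cnt).1 p
        ↔ pvVA maps v p ∨ p ∈ L) ∧
      (pvBfsGo maps (maps.length : Int) (pvColI maps) fuel q v cnt).2
        = cnt + (L.map (pvDval maps)).sum := by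
  intro fuel
  induction fuel with
  | zero =>
      intro q v cnt hd hq hm
      have hq0 : q = [] := by
        cases q with
        | nil => rfl
        | cons p t => simp only [List.length_cons] at hm; omega
      subst hq0
      refine ⟨[], List.nodup_nil, ?_, hd, by simp [pvBfsGo], by simp [pvBfsGo]⟩
      intro y
      simp only [List.not_mem_nil, false_iff]
      exact fun h => pvNw_not_nil h
  | succ fuel ih =>
      intro q v cnt hd hq hm
      match q with
      | [] =>
          refine ⟨[], List.nodup_nil, ?_, hd, by simp [pvBfsGo], by simp [pvBfsGo]⟩
          intro y
          simp only [List.not_mem_nil, false_iff]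
          exact fun h => pvNw_not_nil h
      | (r, c) :: rest =>
          obtain ⟨N, hmem, hnodup, hq2, hcnt2, hdims2, hva2, hfc2⟩ :=
            pvFoldA_char maps r c [((-1 : Int), (0 : Int)), (1, 0), (0, -1), (0, 1)] v cnt rest hd
              (by rw [pvDirsMap]; exact pvNbrsNodup r c)
          rw [pvDirsMap] at hmem
          set F := [((-1 : Int), (0 : Int)), (1, 0), (0, -1), (0, 1)].foldl
            (pvBfsDirStep maps (maps.length : Int) (pvColI maps) r c) (v, cnt, rest) with hF
          have hred : pvBfsGo maps (maps.length : Int) (pvColI maps) (fuel + 1) ((r, c) :: rest) v cnt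
              = pvBfsGo maps (maps.length : Int) (pvColI maps) fuel F.2.2 F.1 F.2.1 := rfl
          obtain ⟨L', hnodup', hmem', hdims', hva', hcnt'⟩ :=
            ih F.2.2 F.1 F.2.1 hdims2 (by
              intro p hp
              rw [hq2] at hp
              rcases List.mem_append.mp hp with hp | hp
              · exact (hva2 p).mpr (Or.inl (hq p (List.mem_cons_of_mem _ hp)))
              · exact (hva2 p).mpr (Or.inr hp))
              (by
                rw [hq2, List.length_append]
                simp only [List.length_cons] at hm
                omega)
          have hexch := pvNw_exchange (maps := maps) (V := pvVA maps v) (N := N)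
            (S := (r, c) :: rest) (S' := rest ++ N) (x := (r, c))
            (List.mem_cons_self ..)
            (by
              intro a ha
              rcases List.mem_append.mp ha with ha | ha
              · exact Or.inl (List.mem_cons_of_mem _ ha)
              · exact Or.inr ha)
            (by
              intro a ha
              rcases List.mem_cons.mp ha with rfl | ha
              · exact Or.inl rfl
              · exact Or.inr (List.mem_append_left _ ha))
            (fun a ha => List.mem_append_right _ ha)
            (fun y => hmem y)
          rw [hq2] at hmem'
          have hNL' : ∀ y ∈ N, y ∉ L' := by
            intro y hyN hyL'
            have h1 := pvNw_notV ((hmem' y).mp hyL')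
            exact h1 ((hva2 y).mpr (Or.inr hyN))
          refine ⟨N ++ L', ?_, ?_, ?_, ?_, ?_⟩
          · exact List.nodup_append.mpr
              ⟨hnodup, hnodup', fun a ha b hb hab => hNL' a ha (hab ▸ hb)⟩
          · intro y
            rw [List.mem_append, hexch y]
            constructor
            · rintro (h | h)
              · exact Or.inl h
              · exact Or.inr (pvNw_congr (fun z => hva2 z) (fun a => Iff.rfl)
                  ((hmem' y).mp h))
            · rintro (h | h)
              · exact Or.inl h
              · exact Or.inr ((hmem' y).mpr (pvNw_congr (fun z => (hva2 z).symm)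
                  (fun a => Iff.rfl) h))
          · rw [hred]; exact hdims'
          · intro p
            rw [hred]
            rw [hva' p, hva2 p, List.mem_append]
            tauto
          · rw [hred, hcnt', hcnt2, List.map_append, List.sum_append, add_assoc]

-- the visited matrix starts all-false
theorem pvVGetInit (n m : Nat) (i j : Int) :
    pvVGet (List.replicate n (List.replicate m false)) i j = false := by
  by_cases h : i.toNat < n
  · simp only [pvVGet, List.getD_eq_getElem?_getD, List.getElem?_replicate, if_pos h,
      Option.getD_some]
    by_cases h2 : j.toNat < m
    · simp [List.getElem?_replicate, h2]
    · simp [List.getElem?_replicate, h2]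
  · simp [pvVGet, List.getD_eq_getElem?_getD, List.getElem?_replicate, h]

theorem pvFalseCountLe (maps : List String) (v : List (List Bool)) (hd : pvDims maps v) :
    pvFalseCount v ≤ maps.length * (pvColI maps).toNat := by
  unfold pvFalseCount
  calc (v.map (fun r => r.count false)).sum
      ≤ (v.map (fun r => r.length)).sum := by
        apply List.sum_le_sum
        intro r hr
        exact List.count_le_length
    _ = maps.length * (pvColI maps).toNat := by
        rw [List.map_congr_left (fun r hr => hd.2 r hr)]
        rw [List.map_const', List.sum_replicate, smul_eq_mul, hd.1]

theorem pvFtEq (maps : List String) :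
    (((maps.length : Int)) * pvColI maps + 1).toNat = maps.length * (pvColI maps).toNat + 1 := by
  have hcol : pvColI maps = ((maps.headD "").toList.length : Int) := PySem.Str.len_eq _
  rw [hcol, Int.toNat_natCast, ← Nat.cast_mul, ← Nat.cast_one, ← Nat.cast_add,
    Int.toNat_natCast]

-- ---------- connectivity ----------
theorem pvNbrs_symm {p q : Int × Int} : q ∈ pvNbrs p ↔ p ∈ pvNbrs q := by
  obtain ⟨a, b⟩ := p; obtain ⟨c, d⟩ := q
  simp [pvNbrs, Prod.ext_iff]
  omega

inductive pvConn (maps : List String) (s : Int × Int) : Int × Int → Prop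
  | refl : pvOpen maps s → pvConn maps s s
  | step (z y : Int × Int) : pvConn maps s z → y ∈ pvNbrs z → pvOpen maps y → pvConn maps s y

theorem pvConn_open_right {maps : List String} {s y : Int × Int} (h : pvConn maps s y) :
    pvOpen maps y := by
  cases h with
  | refl h => exact h
  | step z y _ _ ho => exact ho

theorem pvConn_trans {maps : List String} {a b c : Int × Int}
    (h1 : pvConn maps a b) (h2 : pvConn maps b c) : pvConn maps a c := by
  induction h2 with
  | refl _ => exact h1
  | step z y hz hy ho ih => exact pvConn.step z y ih hy ho

theorem pvConn_symm {maps : List String} {a b : Int × Int} (h : pvConn maps a b) :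
    pvConn maps b a := by
  induction h with
  | refl h => exact pvConn.refl h
  | step z y hz hy ho ih =>
      exact pvConn_trans
        (pvConn.step y z (pvConn.refl ho) (pvNbrs_symm.mp hy) (pvConn_open_right hz)) ih

-- a set of whole components: open, and closed under stepping to open neighbours
def pvClosedU (maps : List String) (V : Int × Int → Prop) : Prop :=
  (∀ p, V p → pvOpen maps p) ∧
  (∀ p q, V p → q ∈ pvNbrs p → pvOpen maps q → V q)

theorem pvClosed_conn {maps : List String} {V : Int × Int → Prop} (hc : pvClosedU maps V)
    {x y : Int × Int} (hx : V x) (h : pvConn maps x y) : V y := by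
  induction h with
  | refl _ => exact hx
  | step z y hz hy ho ih => exact hc.2 z y ih hy ho

-- BFS's newly-visited set from seed s over already-closed V is exactly comp(s) \ {s}
theorem pvNw_iff_conn {maps : List String} {V : Int × Int → Prop}
    (hc : pvClosedU maps V) {s : Int × Int} (hs : pvOpen maps s) (hsV : ¬ V s) :
    ∀ y, pvNw maps (fun z => V z ∨ z = s) [s] y ↔ (pvConn maps s y ∧ y ≠ s) := by
  have hnotV : ∀ y, pvConn maps s y → ¬ V y := by
    intro y hconn hVy
    exact hsV (pvClosed_conn hc hVy (pvConn_symm hconn))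
  intro y
  constructor
  · intro h
    induction h with
    | seed x y hx hy ho hv =>
        rcases List.mem_singleton.mp hx with rfl
        refine ⟨pvConn.step _ _ (pvConn.refl hs) hy ho, ?_⟩
        intro h; exact hv (Or.inr h)
    | step z y hz hy ho hv ih =>
        refine ⟨pvConn.step _ _ ih.1 hy ho, ?_⟩
        intro h; exact hv (Or.inr h)
  · rintro ⟨hconn, hne⟩
    induction hconn with
    | refl _ => exact absurd rfl hne
    | step z y hz hy ho ih =>
        have hyv : ¬ (V y ∨ y = s) := by
          rintro (h | rfl)
          · exact hnotV y (pvConn.step z y hz hy ho) h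
          · exact hne rfl
        by_cases hzs : z = s
        · subst hzs
          exact pvNw.seed z y (List.mem_singleton.mpr rfl) hy ho hyv
        · exact pvNw.step z y (ih hzs) hy ho hyv

-- ---------- components as finsets ----------
noncomputable def pvGridF (maps : List String) : Finset (Int × Int) :=
  Finset.Ico (0 : Int) (maps.length : Int) ×ˢ Finset.Ico (0 : Int) (pvColI maps)

theorem pvMem_gridF {maps : List String} {p : Int × Int} :
    p ∈ pvGridF maps ↔ pvInGrid maps p := by
  simp only [pvGridF, Finset.mem_product, Finset.mem_Ico, pvInGrid]
  tauto

noncomputable def pvCompF (maps : List String) (s : Int × Int) : Finset (Int × Int) :=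
  @Finset.filter _ (fun p => pvConn maps s p) (Classical.decPred _) (pvGridF maps)

theorem pvMem_compF {maps : List String} {s p : Int × Int} :
    p ∈ pvCompF maps s ↔ pvConn maps s p := by
  simp only [pvCompF, Finset.mem_filter]
  constructor
  · exact fun h => h.2
  · intro h
    exact ⟨pvMem_gridF.mpr (pvConn_open_right h).1, h⟩

noncomputable def pvCompSum (maps : List String) (s : Int × Int) : Int :=
  ∑ p ∈ pvCompF maps s, pvDval maps p

-- the digit sum of a component from the seed plus a nodup enumeration of the rest
theorem pvCompSum_eq {maps : List String} {s : Int × Int} (hs : pvOpen maps s)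
    {L : List (Int × Int)} (hnd : L.Nodup)
    (hmem : ∀ y, y ∈ L ↔ pvConn maps s y ∧ y ≠ s) :
    pvDig maps s.1 s.2 + (L.map (pvDval maps)).sum = pvCompSum maps s := by
  have hsL : s ∉ L := fun h => ((hmem s).mp h).2 rfl
  have hset : pvCompF maps s = insert s L.toFinset := by
    apply Finset.ext
    intro p
    rw [pvMem_compF, Finset.mem_insert, List.mem_toFinset]
    constructor
    · intro h
      by_cases hp : p = s
      · exact Or.inl hp
      · exact Or.inr ((hmem p).mpr ⟨h, hp⟩)
    · rintro (rfl | h)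
      · exact pvConn.refl hs
      · exact ((hmem p).mp h).1
  rw [pvCompSum, hset, Finset.sum_insert (by simpa using hsL)]
  rw [List.sum_toFinset _ hnd]
  rfl


-- ---------- nested range loops as one fold over the cell list ----------
theorem pvFoldlNest {a b g : Type} (outer : List b) (inner : List g) (f : a → b → g → a) :
    ∀ init, outer.foldl (fun st i => inner.foldl (fun st j => f st i j) st) init
      = (outer.flatMap (fun i => inner.map (fun j => (i, j)))).foldl
          (fun st c => f st c.1 c.2) init := by
  induction outer with
  | nil => intro init; rfl
  | cons i os ih =>
      intro init
      rw [List.foldl_cons, List.flatMap_cons, List.foldl_append, ih, List.foldl_map]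

def pvCellsN (row colN : Nat) : List (Nat × Nat) :=
  (List.range row).flatMap (fun i => (List.range colN).map (fun j => (i, j)))

theorem pvMem_cellsN {row colN : Nat} {c : Nat × Nat} :
    c ∈ pvCellsN row colN ↔ c.1 < row ∧ c.2 < colN := by
  obtain ⟨i, j⟩ := c
  simp [pvCellsN, List.mem_flatMap, Prod.ext_iff]

theorem pvCellsN_nodup (row colN : Nat) : (pvCellsN row colN).Nodup := by
  apply List.nodup_flatMap.mpr
  constructor
  · intro i _
    exact List.Nodup.map (fun a b h => by simpa using congrArg Prod.snd h) (List.nodup_range)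
  · apply List.Pairwise.imp ?_ (List.nodup_range (n := row))
    intro i i' hne p hp hp'
    simp only [List.mem_map] at hp hp'
    obtain ⟨j, _, rfl⟩ := hp
    obtain ⟨j', _, h⟩ := hp'
    exact hne (by simpa using (congrArg Prod.fst h).symm)

def pvToI (c : Nat × Nat) : Int × Int := ((c.1 : Int), (c.2 : Int))

def pvCellsI (maps : List String) : List (Int × Int) :=
  (pvCellsN maps.length (pvColI maps).toNat).map pvToI

theorem pvToI_inj : Function.Injective pvToI := by
  rintro ⟨a, b⟩ ⟨c, d⟩ h
  simp [pvToI, Prod.ext_iff] at h ⊢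
  omega

theorem pvMem_cellsI {maps : List String} {p : Int × Int} :
    p ∈ pvCellsI maps ↔ pvInGrid maps p := by
  obtain ⟨x, y⟩ := p
  simp only [pvCellsI, List.mem_map]
  constructor
  · rintro ⟨⟨i, j⟩, hm, h⟩
    obtain ⟨h1, h2⟩ := pvMem_cellsN.mp hm
    obtain ⟨rfl, rfl⟩ : (x = (i : Int)) ∧ (y = (j : Int)) := by
      simpa [pvToI, Prod.ext_iff, eq_comm] using h
    have h1' : (i : Int) < (maps.length : Int) := by exact_mod_cast h1
    have h2' : (j : Int) < ((pvColI maps).toNat : Int) := by exact_mod_cast h2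
    exact ⟨by positivity, h1', by positivity, by omega⟩
  · rintro ⟨h1, h2, h3, h4⟩
    refine ⟨(x.toNat, y.toNat), pvMem_cellsN.mpr ⟨?_, ?_⟩, ?_⟩
    · omega
    · omega
    · simp [pvToI, Prod.ext_iff]
      omega

-- ---------- A's outer double loop, characterised on its own ----------
def pvStepA (maps : List String) (st : List (List Bool) × List Int) (c : Int × Int) :
    List (List Bool) × List Int :=
  if pvCh maps c.1 c.2 = 'X' ∨ pvVGet st.1 c.1 c.2 = true then st
  else
    let v1 := pvVSet st.1 c.1 c.2
    let r := pvBfsGo maps (maps.length : Int) (pvColI maps)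
      (((maps.length : Int) * pvColI maps + 1).toNat) [c] v1 (pvDig maps c.1 c.2)
    (r.1, st.2 ++ [r.2])

def pvInvA (maps : List String) (v : List (List Bool)) (S : List (Int × Int)) : Prop :=
  pvDims maps v ∧ (∀ s ∈ S, pvOpen maps s) ∧
  (∀ p, pvVA maps v p ↔ ∃ s ∈ S, pvConn maps s p) ∧
  S.Pairwise (fun a b => ¬ pvConn maps a b)

theorem pvVA_closed {maps : List String} {v : List (List Bool)} {S : List (Int × Int)}
    (h : pvInvA maps v S) : pvClosedU maps (pvVA maps v) := by
  constructor
  · intro p hp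
    obtain ⟨s, _, hc⟩ := (h.2.2.1 p).mp hp
    exact pvConn_open_right hc
  · intro p q hp hq ho
    obtain ⟨s, hs, hc⟩ := (h.2.2.1 p).mp hp
    exact (h.2.2.1 q).mpr ⟨s, hs, pvConn.step p q hc hq ho⟩

theorem pvAFoldInv (maps : List String) :
    ∀ (cs : List (Int × Int)) (v : List (List Bool)) (res : List Int) (S : List (Int × Int)),
    (∀ c ∈ cs, pvInGrid maps c) →
    pvInvA maps v S →
    res = S.map (pvCompSum maps) →
    ∃ S' : List (Int × Int),
      pvInvA maps (cs.foldl (pvStepA maps) (v, res)).1 S' ∧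
      (cs.foldl (pvStepA maps) (v, res)).2 = S'.map (pvCompSum maps) ∧
      (∀ s ∈ S, s ∈ S') ∧
      (∀ c ∈ cs, pvOpen maps c → pvVA maps (cs.foldl (pvStepA maps) (v, res)).1 c) := by
  intro cs
  induction cs with
  | nil =>
      intro v res S _ hinv hres
      exact ⟨S, hinv, hres, fun s hs => hs, by simp⟩
  | cons c cs ih =>
      intro v res S hgrid hinv hres
      have hcg : pvInGrid maps c := hgrid c (List.mem_cons_self ..)
      have hgrid' : ∀ x ∈ cs, pvInGrid maps x := fun x hx => hgrid x (List.mem_cons_of_mem _ hx)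
      rw [List.foldl_cons]
      by_cases hskip : pvCh maps c.1 c.2 = 'X' ∨ pvVGet v c.1 c.2 = true
      · have hst : pvStepA maps (v, res) c = (v, res) := by
          simp only [pvStepA]; rw [if_pos hskip]
        rw [hst]
        obtain ⟨S', h1, h2, h3, h4⟩ := ih v res S hgrid' hinv hres
        refine ⟨S', h1, h2, h3, ?_⟩
        intro x hx ho
        rcases List.mem_cons.mp hx with rfl | hx
        · -- the scanned cell itself: it is open, so the skip was "already visited"
          rcases hskip with hX | hvis
          · exact absurd hX ho.2
          · have hVA : pvVA maps v x := ⟨hcg, hvis⟩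
            obtain ⟨s, hs, hc⟩ := (hinv.2.2.1 x).mp hVA
            exact (h1.2.2.1 x).mpr ⟨s, h3 s hs, hc⟩
        · exact h4 x hx ho
      · push_neg at hskip
        obtain ⟨hX, hnv⟩ := hskip
        have hopen : pvOpen maps c := ⟨hcg, hX⟩
        have hnVA : ¬ pvVA maps v c := by
          intro h
          rw [h.2] at hnv; exact hnv rfl
        have hd1 : pvDims maps (pvVSet v c.1 c.2) := by
          have := pvDims_set maps v c.1 c.2 hinv.1 (by obtain ⟨a, b⟩ := c; exact hcg)
          exact this
        have hva1 := pvVA_set maps v c.1 c.2 hinv.1 (by obtain ⟨a, b⟩ := c; exact hcg)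
        have hnvb : pvVGet v c.1 c.2 = false := by
          cases h : pvVGet v c.1 c.2
          · rfl
          · exact absurd h hnv
        have hfc1 := pvFalse_set maps v c.1 c.2 hinv.1 (by obtain ⟨a, b⟩ := c; exact hcg) hnvb
        have hfcle := pvFalseCountLe maps v hinv.1
        obtain ⟨L, hndL, hmemL, hdims2, hva2, hcnt2⟩ :=
          pvBfsGo_char maps (((maps.length : Int)) * pvColI maps + 1).toNat [c]
            (pvVSet v c.1 c.2) (pvDig maps c.1 c.2) hd1
            (by
              intro p hp
              rw [List.mem_singleton.mp hp]
              exact (hva1 c).mpr (Or.inr (by obtain ⟨a, b⟩ := c; rfl)))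
            (by rw [pvFtEq]; simp only [List.length_cons, List.length_nil]; omega)
        -- the newly visited cells are exactly comp(c) minus c
        have hL : ∀ y, y ∈ L ↔ (pvConn maps c y ∧ y ≠ c) := by
          intro y
          rw [hmemL y]
          have hcongr : ∀ z, pvVA maps (pvVSet v c.1 c.2) z ↔ (pvVA maps v z ∨ z = c) := by
            intro z
            rw [hva1 z]
          constructor
          · intro h
            exact (pvNw_iff_conn (pvVA_closed hinv) hopen hnVA y).mp
              (pvNw_congr hcongr (fun a => Iff.rfl) h)
          · intro h
            exact pvNw_congr (fun z => (hcongr z).symm) (fun a => Iff.rfl)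
              ((pvNw_iff_conn (pvVA_closed hinv) hopen hnVA y).mpr h)
        have hst : pvStepA maps (v, res) c
            = ((pvBfsGo maps (maps.length : Int) (pvColI maps)
                (((maps.length : Int) * pvColI maps + 1).toNat) [c]
                (pvVSet v c.1 c.2) (pvDig maps c.1 c.2)).1,
               res ++ [(pvBfsGo maps (maps.length : Int) (pvColI maps)
                (((maps.length : Int) * pvColI maps + 1).toNat) [c]
                (pvVSet v c.1 c.2) (pvDig maps c.1 c.2)).2]) := by
          simp only [pvStepA]
          rw [if_neg (by push_neg; exact ⟨hX, hnv⟩)]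
        rw [hst]
        -- the new invariant with seed list S ++ [c]
        have hinv2 : pvInvA maps (pvBfsGo maps (maps.length : Int) (pvColI maps)
            (((maps.length : Int) * pvColI maps + 1).toNat) [c]
            (pvVSet v c.1 c.2) (pvDig maps c.1 c.2)).1 (S ++ [c]) := by
          refine ⟨hdims2, ?_, ?_, ?_⟩
          · intro s hs
            rcases List.mem_append.mp hs with hs | hs
            · exact hinv.2.1 s hs
            · rw [List.mem_singleton.mp hs]; exact hopen
          · intro p
            rw [hva2 p]
            have hb := hva1 p
            have hc2 := hinv.2.2.1 p
            constructor
            · rintro (hv | hl)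
              · rcases (hb.mp hv : pvVA maps v p ∨ p = c) with hv' | rfl
                · obtain ⟨s, hs, hcn⟩ := hc2.mp hv'
                  exact ⟨s, List.mem_append_left _ hs, hcn⟩
                · exact ⟨c, List.mem_append_right _ (List.mem_singleton.mpr rfl), pvConn.refl hopen⟩
              · obtain ⟨hcn, _⟩ := (hL p).mp hl
                exact ⟨c, List.mem_append_right _ (List.mem_singleton.mpr rfl), hcn⟩
            · rintro ⟨s, hs, hcn⟩
              rcases List.mem_append.mp hs with hs | hs
              · left
                exact hb.mpr (Or.inl (hc2.mpr ⟨s, hs, hcn⟩))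
              · rw [List.mem_singleton.mp hs] at hcn
                by_cases hpc : p = c
                · left
                  exact hb.mpr (Or.inr hpc)
                · right
                  exact (hL p).mpr ⟨hcn, hpc⟩
          · rw [List.pairwise_append]
            refine ⟨hinv.2.2.2, List.pairwise_singleton _ _, ?_⟩
            intro s hs x hx
            rw [List.mem_singleton.mp hx]
            intro hcn
            have hVAs : pvVA maps v s := (hinv.2.2.1 s).mpr ⟨s, hs, pvConn.refl (hinv.2.1 s hs)⟩
            exact hnVA (pvClosed_conn (pvVA_closed hinv) hVAs hcn)
        have hres2 : res ++ [(pvBfsGo maps (maps.length : Int) (pvColI maps)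
            (((maps.length : Int) * pvColI maps + 1).toNat) [c]
            (pvVSet v c.1 c.2) (pvDig maps c.1 c.2)).2]
            = (S ++ [c]).map (pvCompSum maps) := by
          rw [hcnt2, List.map_append, hres]
          congr 1
          simp only [List.map_cons, List.map_nil]
          congr 1
          exact pvCompSum_eq hopen hndL hL
        obtain ⟨S', h1, h2, h3, h4⟩ := ih _ _ (S ++ [c]) hgrid' hinv2 hres2
        refine ⟨S', h1, h2, ?_, ?_⟩
        · intro s hs
          exact h3 s (List.mem_append_left _ hs)
        · intro x hx ho
          rcases List.mem_cons.mp hx with rfl | hx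
          · have : x ∈ S ++ [x] := List.mem_append_right _ (List.mem_singleton.mpr rfl)
            exact (h1.2.2.1 x).mpr ⟨x, h3 x this, pvConn.refl ho⟩
          · exact h4 x hx ho


-- ---------- A's nested range loop is the fold of pvStepA over the cell list ----------
theorem pvNestRange {α : Type} (rowN colN : Nat) (g : α → Int × Int → α) (init : α) :
    (PySem.List.pyRange 0 (rowN : Int) 1).foldl (fun st i =>
      (PySem.List.pyRange 0 (colN : Int) 1).foldl (fun st j => g st (i, j)) st) init
    = ((pvCellsN rowN colN).map pvToI).foldl g init := by
  rw [PySem.List.pyRange_zero_natCast]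
  simp only [PySem.List.pyRange_zero_natCast, List.foldl_map]
  rw [pvFoldlNest (List.range rowN) (List.range colN)
    (fun st i j => g st ((i : Int), (j : Int))) init]
  rfl

theorem pvSolution_eq (s0 : String) (t : List String) :
    solution (s0 :: t)
      = (if ((pvCellsI (s0 :: t)).foldl (pvStepA (s0 :: t))
            (List.replicate (s0 :: t).length
              (List.replicate (pvColI (s0 :: t)).toNat false), ([] : List Int))).2 = []
         then [-1]
         else PySem.List.sorted ((pvCellsI (s0 :: t)).foldl (pvStepA (s0 :: t))
            (List.replicate (s0 :: t).length
              (List.replicate (pvColI (s0 :: t)).toNat false), ([] : List Int))).2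
            (fun x => x) false) := by
  rw [show pvCellsI (s0 :: t)
      = (pvCellsN (s0 :: t).length (pvColI (s0 :: t)).toNat).map pvToI from rfl]
  rw [← pvNestRange (s0 :: t).length (pvColI (s0 :: t)).toNat (pvStepA (s0 :: t))]
  rfl

theorem pvA_char (s0 : String) (t : List String) :
    ∃ S : List (Int × Int),
      (∀ s ∈ S, pvOpen (s0 :: t) s) ∧
      S.Pairwise (fun a b => ¬ pvConn (s0 :: t) a b) ∧
      (∀ p, pvOpen (s0 :: t) p ↔ ∃ s ∈ S, pvConn (s0 :: t) s p) ∧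
      solution (s0 :: t) = (if S = [] then [-1]
        else PySem.List.sorted (S.map (pvCompSum (s0 :: t))) (fun x => x) false) := by
  have hinv0 : pvInvA (s0 :: t)
      (List.replicate (s0 :: t).length (List.replicate (pvColI (s0 :: t)).toNat false)) [] := by
    refine ⟨⟨by simp, ?_⟩, by simp, ?_, by simp⟩
    · intro r hr
      rw [List.eq_of_mem_replicate hr, List.length_replicate]
    · intro p
      simp [pvVA, pvVGetInit]
  obtain ⟨S, hinv, hres, _, hcov⟩ := pvAFoldInv (s0 :: t) (pvCellsI (s0 :: t)) _ [] []
    (fun c hc => pvMem_cellsI.mp hc) hinv0 (by simp)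
  refine ⟨S, hinv.2.1, hinv.2.2.2, ?_, ?_⟩
  · intro p
    constructor
    · intro hp
      exact (hinv.2.2.1 p).mp (hcov p (pvMem_cellsI.mpr hp.1) hp)
    · rintro ⟨sx, hs, hc⟩
      exact pvConn_open_right hc
  · rw [pvSolution_eq s0 t, hres]
    by_cases hS : S = []
    · simp [hS]
    · rw [if_neg (by simpa using hS), if_neg hS]


-- ---------- union-find: roots, stability, the effect of linking ----------
def pvWf (p : List Nat) : Prop := ∀ x, p.getD x x ≤ x

def pvR (p : List Nat) (x : Nat) : Nat := pvFind p (x + 1) x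

theorem pvFind_succ (p : List Nat) (f x : Nat) :
    pvFind p (f + 1) x = if p.getD x x = x then x else pvFind p f (p.getD x x) := rfl

theorem pvR_of_root {p : List Nat} {x : Nat} (h : p.getD x x = x) : pvR p x = x := by
  unfold pvR
  rw [pvFind_succ, if_pos h]

theorem pvFind_stable (p : List Nat) (hw : pvWf p) :
    ∀ x f, x < f → pvFind p f x = pvR p x := by
  intro x
  induction x using Nat.strong_induction_on with
  | _ x ih =>
    intro f hf
    obtain ⟨f', rfl⟩ : ∃ f', f = f' + 1 := ⟨f - 1, by omega⟩
    by_cases hroot : p.getD x x = x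
    · rw [pvFind_succ, if_pos hroot, pvR_of_root hroot]
    · have hlt : p.getD x x < x := lt_of_le_of_ne (hw x) hroot
      have h1 : pvFind p (f' + 1) x = pvFind p f' (p.getD x x) := by
        rw [pvFind_succ, if_neg hroot]
      have h2 : pvR p x = pvFind p x (p.getD x x) := by
        unfold pvR
        rw [pvFind_succ, if_neg hroot]
      rw [h1, h2, ih _ hlt f' (by omega), ih _ hlt x hlt]

theorem pvR_step {p : List Nat} (hw : pvWf p) {x : Nat} (h : p.getD x x ≠ x) :
    pvR p x = pvR p (p.getD x x) := by
  have hlt : p.getD x x < x := lt_of_le_of_ne (hw x) h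
  have h2 : pvR p x = pvFind p x (p.getD x x) := by
    unfold pvR
    rw [pvFind_succ, if_neg h]
  rw [h2, pvFind_stable p hw _ x hlt]

theorem pvR_root {p : List Nat} (hw : pvWf p) (x : Nat) :
    p.getD (pvR p x) (pvR p x) = pvR p x := by
  induction x using Nat.strong_induction_on with
  | _ x ih =>
    by_cases hroot : p.getD x x = x
    · rw [pvR_of_root hroot]; exact hroot
    · rw [pvR_step hw hroot]
      exact ih _ (lt_of_le_of_ne (hw x) hroot)

theorem pvR_le {p : List Nat} (hw : pvWf p) (x : Nat) : pvR p x ≤ x := by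
  induction x using Nat.strong_induction_on with
  | _ x ih =>
    by_cases hroot : p.getD x x = x
    · rw [pvR_of_root hroot]
    · rw [pvR_step hw hroot]
      have hlt : p.getD x x < x := lt_of_le_of_ne (hw x) hroot
      exact le_trans (ih _ hlt) (le_of_lt hlt)

theorem pvGetD_set_nat (p : List Nat) (r s2 x : Nat) (hr : r < p.length) :
    (p.set r s2).getD x x = if x = r then s2 else p.getD x x := by
  by_cases h : x = r
  · subst h
    rw [if_pos rfl, pvGetDSetSelf p x s2 x hr]
  · rw [if_neg h, pvGetDSetNe p r x s2 x (fun w => h w.symm)]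

-- pointing the root r at the root s2 < r rewires exactly the class of r
theorem pvR_set {p : List Nat} (hw : pvWf p) {r s2 : Nat}
    (hr : p.getD r r = r) (hs : p.getD s2 s2 = s2) (hlt : s2 < r) (hrlen : r < p.length) :
    pvWf (p.set r s2) ∧ ∀ x, pvR (p.set r s2) x = if pvR p x = r then s2 else pvR p x := by
  have hwf : pvWf (p.set r s2) := by
    intro x
    rw [pvGetD_set_nat p r s2 x hrlen]
    by_cases h : x = r
    · rw [if_pos h]; omega
    · rw [if_neg h]; exact hw x
  refine ⟨hwf, ?_⟩
  intro x
  induction x using Nat.strong_induction_on with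
  | _ x ih =>
    by_cases hxr : x = r
    · subst hxr
      have h1 : (p.set x s2).getD x x = s2 := by
        rw [pvGetD_set_nat p x s2 x hrlen, if_pos rfl]
      have h2 : pvR (p.set x s2) x = pvR (p.set x s2) s2 := by
        rw [pvR_step hwf (by rw [h1]; omega), h1]
      have h3 : pvR (p.set x s2) s2 = s2 := by
        apply pvR_of_root
        rw [pvGetD_set_nat p x s2 s2 hrlen, if_neg (by omega)]
        exact hs
      rw [h2, h3, if_pos (pvR_of_root hr)]
    · have hgx : (p.set r s2).getD x x = p.getD x x := by
        rw [pvGetD_set_nat p r s2 x hrlen, if_neg hxr]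
      by_cases hroot : p.getD x x = x
      · rw [pvR_of_root (by rw [hgx]; exact hroot), pvR_of_root hroot, if_neg hxr]
      · have hlt2 : p.getD x x < x := lt_of_le_of_ne (hw x) hroot
        rw [pvR_step hwf (by rw [hgx]; exact hroot), hgx,
          pvR_step hw hroot, ih _ hlt2]

theorem pvUnion_spec (p : List Nat) (hw : pvWf p) (a b : Nat)
    (ha : a < p.length) (hb : b < p.length) :
    (pvUnion p a b).length = p.length ∧ pvWf (pvUnion p a b) ∧
    pvR (pvUnion p a b) a = pvR (pvUnion p a b) b ∧
    (∀ x y, pvR p x = pvR p y → pvR (pvUnion p a b) x = pvR (pvUnion p a b) y) ∧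
    (∀ x y, pvR (pvUnion p a b) x = pvR (pvUnion p a b) y →
      pvR p x = pvR p y ∨ (pvR p x = pvR p a ∧ pvR p y = pvR p b)
        ∨ (pvR p x = pvR p b ∧ pvR p y = pvR p a)) ∧
    (∀ x, pvR (pvUnion p a b) x = pvR p x
        ∨ (pvR (pvUnion p a b) x = pvR p b ∧ pvR p x = pvR p a)
        ∨ (pvR (pvUnion p a b) x = pvR p a ∧ pvR p x = pvR p b)) := by
  have hfa : pvFind p p.length a = pvR p a := pvFind_stable p hw a p.length ha
  have hfb : pvFind p p.length b = pvR p b := pvFind_stable p hw b p.length hb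
  have hue : pvUnion p a b = (if pvR p a = pvR p b then p
      else if pvR p a < pvR p b then p.set (pvR p b) (pvR p a)
      else p.set (pvR p a) (pvR p b)) := by
    rw [pvUnion, hfa, hfb]
  rcases Nat.lt_trichotomy (pvR p a) (pvR p b) with hab | hab | hab
  · have hne : pvR p a ≠ pvR p b := by omega
    have hset : pvUnion p a b = p.set (pvR p b) (pvR p a) := by
      rw [hue, if_neg hne, if_pos hab]
    have hrlen : pvR p b < p.length := lt_of_le_of_lt (pvR_le hw b) hb
    obtain ⟨hwf, hform⟩ := pvR_set hw (pvR_root hw b) (pvR_root hw a) hab hrlen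
    rw [hset]
    refine ⟨by simp, hwf, ?_, ?_, ?_, ?_⟩
    · rw [hform a, hform b, if_neg hne, if_pos rfl]
    · intro x y hxy
      rw [hform x, hform y, hxy]
    · intro x y hxy
      rw [hform x, hform y] at hxy
      by_cases hx : pvR p x = pvR p b <;> by_cases hy : pvR p y = pvR p b
      · left; rw [hx, hy]
      · rw [if_pos hx, if_neg hy] at hxy
        right; right; exact ⟨hx, by omega⟩
      · rw [if_neg hx, if_pos hy] at hxy
        right; left; exact ⟨by omega, hy⟩
      · rw [if_neg hx, if_neg hy] at hxy
        tauto
    · intro x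
      rw [hform x]
      by_cases hx : pvR p x = pvR p b
      · rw [if_pos hx]
        right; right; exact ⟨rfl, hx⟩
      · rw [if_neg hx]
        left; rfl
  · have hset : pvUnion p a b = p := by rw [hue, if_pos hab]
    rw [hset]
    exact ⟨rfl, hw, hab, fun x y h => h, fun x y h => Or.inl h, fun x => Or.inl rfl⟩
  · have hne : pvR p b ≠ pvR p a := by omega
    have hset : pvUnion p a b = p.set (pvR p a) (pvR p b) := by
      rw [hue, if_neg (by omega), if_neg (by omega)]
    have hrlen : pvR p a < p.length := lt_of_le_of_lt (pvR_le hw a) ha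
    obtain ⟨hwf, hform⟩ := pvR_set hw (pvR_root hw a) (pvR_root hw b) hab hrlen
    rw [hset]
    refine ⟨by simp, hwf, ?_, ?_, ?_, ?_⟩
    · rw [hform a, hform b, if_pos rfl, if_neg hne]
    · intro x y hxy
      rw [hform x, hform y, hxy]
    · intro x y hxy
      rw [hform x, hform y] at hxy
      by_cases hx : pvR p x = pvR p a <;> by_cases hy : pvR p y = pvR p a
      · left; rw [hx, hy]
      · rw [if_pos hx, if_neg hy] at hxy
        right; left; exact ⟨hx, by omega⟩
      · rw [if_neg hx, if_pos hy] at hxy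
        right; right; exact ⟨by omega, hy⟩
      · rw [if_neg hx, if_neg hy] at hxy
        tauto
    · intro x
      rw [hform x]
      by_cases hx : pvR p x = pvR p a
      · rw [if_pos hx]
        right; left; exact ⟨rfl, hx⟩
      · rw [if_neg hx]
        left; rfl

theorem pvRangeGetD (n x : Nat) : (List.range n).getD x x = x := by
  by_cases h : x < n
  · rw [List.getD_eq_getElem _ _ (by simpa using h)]
    simp
  · rw [List.getD_eq_default _ _ (by simpa using h)]

theorem pvWf_range (n : Nat) : pvWf (List.range n) := by
  intro x
  rw [pvRangeGetD]

theorem pvR_range (n x : Nat) : pvR (List.range n) x = x :=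
  pvR_of_root (pvRangeGetD n x)


-- ---------- flat indices and coordinates ----------
theorem pvColI_nonneg (maps : List String) : 0 ≤ pvColI maps := by
  rw [pvColI, PySem.Str.len_eq]
  positivity

def pvCellI (maps : List String) (x : Nat) : Int × Int :=
  ((↑(x / (pvColI maps).toNat) : Int), (↑(x % (pvColI maps).toNat) : Int))

theorem pvIdx_lt {rowN colN : Nat} {c : Nat × Nat} (h1 : c.1 < rowN) (h2 : c.2 < colN) :
    c.1 * colN + c.2 < rowN * colN := by
  have hA : (c.1 + 1) * colN ≤ rowN * colN := Nat.mul_le_mul (by omega) le_rfl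
  have h3 : (c.1 + 1) * colN = c.1 * colN + colN := by ring
  omega

theorem pvIdx_decomp {colN : Nat} {c : Nat × Nat} (h2 : c.2 < colN) :
    (c.1 * colN + c.2) / colN = c.1 ∧ (c.1 * colN + c.2) % colN = c.2 := by
  have hc : 0 < colN := by omega
  constructor
  · rw [mul_comm, Nat.mul_add_div hc, Nat.div_eq_of_lt h2]
    omega
  · rw [mul_comm, Nat.mul_add_mod, Nat.mod_eq_of_lt h2]

theorem pvCellI_idx {maps : List String} {c : Nat × Nat}
    (h2 : c.2 < (pvColI maps).toNat) :
    pvCellI maps (c.1 * (pvColI maps).toNat + c.2) = pvToI c := by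
  obtain ⟨hd, hm⟩ := pvIdx_decomp (colN := (pvColI maps).toNat) h2
  simp [pvCellI, pvToI, hd, hm]

theorem pvOpenN_iff {maps : List String} {c : Nat × Nat}
    (h1 : c.1 < maps.length) (h2 : c.2 < (pvColI maps).toNat) :
    (pvOpen maps (pvToI c) ↔ pvCh maps (c.1 : Int) (c.2 : Int) ≠ 'X') := by
  have hg : pvInGrid maps (pvToI c) := by
    unfold pvInGrid pvToI
    dsimp only
    have h1' : ((c.1 : Int)) < (maps.length : Int) := by exact_mod_cast h1
    have h2' : ((c.2 : Int)) < (((pvColI maps).toNat : Nat) : Int) := by exact_mod_cast h2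
    have h3 := pvColI_nonneg maps
    exact ⟨by positivity, h1', by positivity, by omega⟩
  exact ⟨fun h => h.2, fun h => ⟨hg, h⟩⟩

-- ---------- B's union scan over the cell list ----------
def pvStepU (maps : List String) (rowN colN : Nat) (p : List Nat) (c : Nat × Nat) : List Nat :=
  if pvCh maps c.1 c.2 = 'X' then p
  else
    let idx := c.1 * colN + c.2
    let p1 := if c.2 + 1 < colN ∧ pvCh maps c.1 (c.2 + 1) ≠ 'X' then pvUnion p idx (idx + 1) else p
    if c.1 + 1 < rowN ∧ pvCh maps (c.1 + 1) c.2 ≠ 'X' then pvUnion p1 idx (idx + colN) else p1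

theorem pvUnionScan_eq (maps : List String) (rowN colN : Nat) (p0 : List Nat) :
    pvUnionScan maps rowN colN p0 = (pvCellsN rowN colN).foldl (pvStepU maps rowN colN) p0 := by
  show (List.range rowN).foldl (fun p i =>
      (List.range colN).foldl (fun p j => pvStepU maps rowN colN p (i, j)) p) p0 = _
  rw [pvFoldlNest (List.range rowN) (List.range colN)
    (fun p i j => pvStepU maps rowN colN p (i, j)) p0]
  rfl

def pvInvB (maps : List String) (p : List Nat) : Prop :=
  p.length = maps.length * (pvColI maps).toNat ∧
  pvWf p ∧
  (∀ x, x < p.length → pvConn maps (pvCellI maps x) (pvCellI maps (pvR p x)) ∨ pvR p x = x) ∧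
  (∀ x y, x < p.length → y < p.length → pvR p x = pvR p y →
      x = y ∨ pvConn maps (pvCellI maps x) (pvCellI maps y))

-- a union of two adjacent open cells preserves the invariant
theorem pvInvB_union (maps : List String) {p : List Nat} (hinv : pvInvB maps p)
    {a b : Nat} (ha : a < p.length) (hb : b < p.length)
    (hopa : pvOpen maps (pvCellI maps a)) (hopb : pvOpen maps (pvCellI maps b))
    (hadj : pvCellI maps b ∈ pvNbrs (pvCellI maps a)) :
    pvInvB maps (pvUnion p a b) ∧
    (∀ x y, pvR p x = pvR p y → pvR (pvUnion p a b) x = pvR (pvUnion p a b) y) ∧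
    pvR (pvUnion p a b) a = pvR (pvUnion p a b) b := by
  obtain ⟨hlen, hwf, hB1, hB2⟩ := hinv
  obtain ⟨hlen', hwf', hu1, hu2, hu3, hform⟩ := pvUnion_spec p hwf a b ha hb
  have hedge : pvConn maps (pvCellI maps a) (pvCellI maps b) :=
    pvConn.step _ _ (pvConn.refl hopa) hadj hopb
  have hconnA : pvConn maps (pvCellI maps a) (pvCellI maps (pvR p a)) := by
    rcases hB1 a ha with h | h
    · exact h
    · rw [h]; exact pvConn.refl hopa
  have hconnB : pvConn maps (pvCellI maps b) (pvCellI maps (pvR p b)) := by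
    rcases hB1 b hb with h | h
    · exact h
    · rw [h]; exact pvConn.refl hopb
  refine ⟨⟨by rw [hlen']; exact hlen, hwf', ?_, ?_⟩, hu2, hu1⟩
  · -- roots stay inside the component
    intro x hx
    rw [hlen'] at hx
    rcases hform x with h | ⟨h1, h2⟩ | ⟨h1, h2⟩
    · rcases hB1 x hx with hc | hc
      · left; rw [h]; exact hc
      · right; rw [h]; exact hc
    · -- new root is pvR p b, old root was pvR p a
      left
      rw [h1]
      have hxa : pvConn maps (pvCellI maps x) (pvCellI maps (pvR p a)) := by
        rcases hB1 x hx with hc | hc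
        · rw [h2] at hc; exact hc
        · rw [hc] at h2; rw [h2]
          exact pvConn.refl (pvConn_open_right hconnA)
      exact pvConn_trans hxa
        (pvConn_trans (pvConn_symm hconnA) (pvConn_trans hedge hconnB))
    · left
      rw [h1]
      have hxb : pvConn maps (pvCellI maps x) (pvCellI maps (pvR p b)) := by
        rcases hB1 x hx with hc | hc
        · rw [h2] at hc; exact hc
        · rw [hc] at h2; rw [h2]
          exact pvConn.refl (pvConn_open_right hconnB)
      exact pvConn_trans hxb
        (pvConn_trans (pvConn_symm hconnB) (pvConn_trans (pvConn_symm hedge) hconnA))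
  · -- same root still implies connected
    intro x y hx hy hxy
    rw [hlen'] at hx hy
    have hca : ∀ z, z < p.length → pvR p z = pvR p a →
        pvConn maps (pvCellI maps z) (pvCellI maps a) := by
      intro z hz hza
      rcases hB2 z a hz ha hza with rfl | hc
      · exact pvConn.refl hopa
      · exact hc
    have hcb : ∀ z, z < p.length → pvR p z = pvR p b →
        pvConn maps (pvCellI maps z) (pvCellI maps b) := by
      intro z hz hzb
      rcases hB2 z b hz hb hzb with rfl | hc
      · exact pvConn.refl hopb
      · exact hc
    rcases hu3 x y hxy with h | ⟨h1, h2⟩ | ⟨h1, h2⟩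
    · exact hB2 x y hx hy h
    · right
      exact pvConn_trans (hca x hx h1)
        (pvConn_trans hedge (pvConn_symm (hcb y hy h2)))
    · right
      exact pvConn_trans (hcb x hx h1)
        (pvConn_trans (pvConn_symm hedge) (pvConn_symm (hca y hy h2)))



-- a conditional union, packaged
theorem pvMUnion (maps : List String) {p : List Nat} (hinv : pvInvB maps p)
    (cond : Prop) [Decidable cond] (a b : Nat)
    (h : cond → a < p.length ∧ b < p.length ∧ pvOpen maps (pvCellI maps a)
      ∧ pvOpen maps (pvCellI maps b) ∧ pvCellI maps b ∈ pvNbrs (pvCellI maps a)) :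
    pvInvB maps (if cond then pvUnion p a b else p) ∧
    (∀ x y, pvR p x = pvR p y →
      pvR (if cond then pvUnion p a b else p) x = pvR (if cond then pvUnion p a b else p) y) ∧
    (cond → pvR (if cond then pvUnion p a b else p) a
      = pvR (if cond then pvUnion p a b else p) b) := by
  by_cases hc : cond
  · rw [if_pos hc]
    obtain ⟨h1, h2, h3, h4, h5⟩ := h hc
    obtain ⟨hi, hm, he⟩ := pvInvB_union maps hinv h1 h2 h3 h4 h5
    exact ⟨hi, hm, fun _ => he⟩
  · rw [if_neg hc]
    exact ⟨hinv, fun x y h => h, fun w => absurd w hc⟩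

theorem pvNbr_right {c : Nat × Nat} :
    pvToI (c.1, c.2 + 1) ∈ pvNbrs (pvToI c) := by
  simp [pvNbrs, pvToI, Prod.ext_iff]

theorem pvNbr_down {c : Nat × Nat} :
    pvToI (c.1 + 1, c.2) ∈ pvNbrs (pvToI c) := by
  simp [pvNbrs, pvToI, Prod.ext_iff]

-- one cell of B's union scan
theorem pvStepU_char (maps : List String) {p : List Nat} (hinv : pvInvB maps p)
    {c : Nat × Nat} (hc1 : c.1 < maps.length) (hc2 : c.2 < (pvColI maps).toNat) :
    pvInvB maps (pvStepU maps maps.length (pvColI maps).toNat p c) ∧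
    (∀ x y, pvR p x = pvR p y →
      pvR (pvStepU maps maps.length (pvColI maps).toNat p c) x
        = pvR (pvStepU maps maps.length (pvColI maps).toNat p c) y) ∧
    (pvCh maps c.1 c.2 ≠ 'X' →
      (c.2 + 1 < (pvColI maps).toNat → pvCh maps c.1 ((c.2 + 1 : Nat) : Int) ≠ 'X' →
        pvR (pvStepU maps maps.length (pvColI maps).toNat p c)
            (c.1 * (pvColI maps).toNat + c.2)
          = pvR (pvStepU maps maps.length (pvColI maps).toNat p c)
            (c.1 * (pvColI maps).toNat + c.2 + 1)) ∧
      (c.1 + 1 < maps.length → pvCh maps ((c.1 + 1 : Nat) : Int) c.2 ≠ 'X' →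
        pvR (pvStepU maps maps.length (pvColI maps).toNat p c)
            (c.1 * (pvColI maps).toNat + c.2)
          = pvR (pvStepU maps maps.length (pvColI maps).toNat p c)
            (c.1 * (pvColI maps).toNat + c.2 + (pvColI maps).toNat))) := by
  by_cases hX : pvCh maps (c.1 : Int) (c.2 : Int) = 'X'
  · have hstep : pvStepU maps maps.length (pvColI maps).toNat p c = p := by
      simp only [pvStepU]
      rw [if_pos hX]
    rw [hstep]
    exact ⟨hinv, fun x y h => h, fun h => absurd hX h⟩
  · have hop : pvOpen maps (pvCellI maps (c.1 * (pvColI maps).toNat + c.2)) := by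
      rw [pvCellI_idx hc2]
      exact (pvOpenN_iff hc1 hc2).mpr hX
    have hside1 : (c.2 + 1 < (pvColI maps).toNat ∧ pvCh maps (c.1 : Int) ((c.2 + 1 : Nat) : Int) ≠ 'X') →
        c.1 * (pvColI maps).toNat + c.2 < p.length
        ∧ c.1 * (pvColI maps).toNat + c.2 + 1 < p.length
        ∧ pvOpen maps (pvCellI maps (c.1 * (pvColI maps).toNat + c.2))
        ∧ pvOpen maps (pvCellI maps (c.1 * (pvColI maps).toNat + c.2 + 1))
        ∧ pvCellI maps (c.1 * (pvColI maps).toNat + c.2 + 1)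
            ∈ pvNbrs (pvCellI maps (c.1 * (pvColI maps).toNat + c.2)) := by
      rintro ⟨hb, hch⟩
      have he1 : c.1 * (pvColI maps).toNat + c.2 + 1
          = c.1 * (pvColI maps).toNat + (c.2 + 1) := rfl
      have hcell : pvCellI maps (c.1 * (pvColI maps).toNat + c.2 + 1)
          = pvToI (c.1, c.2 + 1) := by
        rw [he1]
        exact pvCellI_idx (c := (c.1, c.2 + 1)) hb
      refine ⟨by rw [hinv.1]; exact pvIdx_lt hc1 hc2, ?_, hop, ?_, ?_⟩
      · rw [hinv.1, he1]
        exact pvIdx_lt (c := (c.1, c.2 + 1)) hc1 hb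
      · rw [hcell]
        exact (pvOpenN_iff (c := (c.1, c.2 + 1)) hc1 hb).mpr hch
      · rw [hcell, pvCellI_idx hc2]
        exact pvNbr_right
    obtain ⟨hi1, hm1, he1e⟩ := pvMUnion maps hinv
      (c.2 + 1 < (pvColI maps).toNat ∧ pvCh maps (c.1 : Int) ((c.2 + 1 : Nat) : Int) ≠ 'X')
      (c.1 * (pvColI maps).toNat + c.2) (c.1 * (pvColI maps).toNat + c.2 + 1) hside1
    have hside2 : (c.1 + 1 < maps.length ∧ pvCh maps ((c.1 + 1 : Nat) : Int) (c.2 : Int) ≠ 'X') →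
        c.1 * (pvColI maps).toNat + c.2
          < (if c.2 + 1 < (pvColI maps).toNat ∧ pvCh maps (c.1 : Int) ((c.2 + 1 : Nat) : Int) ≠ 'X'
            then pvUnion p (c.1 * (pvColI maps).toNat + c.2) (c.1 * (pvColI maps).toNat + c.2 + 1)
            else p).length
        ∧ c.1 * (pvColI maps).toNat + c.2 + (pvColI maps).toNat
          < (if c.2 + 1 < (pvColI maps).toNat ∧ pvCh maps (c.1 : Int) ((c.2 + 1 : Nat) : Int) ≠ 'X'
            then pvUnion p (c.1 * (pvColI maps).toNat + c.2) (c.1 * (pvColI maps).toNat + c.2 + 1)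
            else p).length
        ∧ pvOpen maps (pvCellI maps (c.1 * (pvColI maps).toNat + c.2))
        ∧ pvOpen maps (pvCellI maps (c.1 * (pvColI maps).toNat + c.2 + (pvColI maps).toNat))
        ∧ pvCellI maps (c.1 * (pvColI maps).toNat + c.2 + (pvColI maps).toNat)
            ∈ pvNbrs (pvCellI maps (c.1 * (pvColI maps).toNat + c.2)) := by
      rintro ⟨hb, hch⟩
      have he2 : c.1 * (pvColI maps).toNat + c.2 + (pvColI maps).toNat
          = (c.1 + 1) * (pvColI maps).toNat + c.2 := by ring
      have hcell : pvCellI maps (c.1 * (pvColI maps).toNat + c.2 + (pvColI maps).toNat)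
          = pvToI (c.1 + 1, c.2) := by
        rw [he2]
        exact pvCellI_idx (c := (c.1 + 1, c.2)) hc2
      refine ⟨by rw [hi1.1]; exact pvIdx_lt hc1 hc2, ?_, hop, ?_, ?_⟩
      · rw [hi1.1, he2]
        exact pvIdx_lt (c := (c.1 + 1, c.2)) hb hc2
      · rw [hcell]
        exact (pvOpenN_iff (c := (c.1 + 1, c.2)) hb hc2).mpr hch
      · rw [hcell, pvCellI_idx hc2]
        exact pvNbr_down
    obtain ⟨hi2, hm2, he2e⟩ := pvMUnion maps hi1
      (c.1 + 1 < maps.length ∧ pvCh maps ((c.1 + 1 : Nat) : Int) (c.2 : Int) ≠ 'X')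
      (c.1 * (pvColI maps).toNat + c.2) (c.1 * (pvColI maps).toNat + c.2 + (pvColI maps).toNat)
      hside2
    have hstep : pvStepU maps maps.length (pvColI maps).toNat p c
        = (if c.1 + 1 < maps.length ∧ pvCh maps ((c.1 + 1 : Nat) : Int) (c.2 : Int) ≠ 'X'
          then pvUnion (if c.2 + 1 < (pvColI maps).toNat ∧ pvCh maps (c.1 : Int) ((c.2 + 1 : Nat) : Int) ≠ 'X'
            then pvUnion p (c.1 * (pvColI maps).toNat + c.2) (c.1 * (pvColI maps).toNat + c.2 + 1)
            else p) (c.1 * (pvColI maps).toNat + c.2) (c.1 * (pvColI maps).toNat + c.2 + (pvColI maps).toNat)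
          else (if c.2 + 1 < (pvColI maps).toNat ∧ pvCh maps (c.1 : Int) ((c.2 + 1 : Nat) : Int) ≠ 'X'
            then pvUnion p (c.1 * (pvColI maps).toNat + c.2) (c.1 * (pvColI maps).toNat + c.2 + 1)
            else p)) := by
      simp only [pvStepU]
      rw [if_neg hX]
      rfl
    rw [hstep]
    refine ⟨hi2, fun x y h => hm2 x y (hm1 x y h), fun _ => ⟨?_, ?_⟩⟩
    · intro hb hch
      exact hm2 _ _ (he1e ⟨hb, hch⟩)
    · intro hb hch
      exact he2e ⟨hb, hch⟩

-- the edge facts B's first scan guarantees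
def pvEdges (maps : List String) (pf : List Nat) : Prop :=
  ∀ c : Nat × Nat, c.1 < maps.length → c.2 < (pvColI maps).toNat →
    pvCh maps c.1 c.2 ≠ 'X' →
    (c.2 + 1 < (pvColI maps).toNat → pvCh maps c.1 ((c.2 + 1 : Nat) : Int) ≠ 'X' →
      pvR pf (c.1 * (pvColI maps).toNat + c.2)
        = pvR pf (c.1 * (pvColI maps).toNat + c.2 + 1)) ∧
    (c.1 + 1 < maps.length → pvCh maps ((c.1 + 1 : Nat) : Int) c.2 ≠ 'X' →
      pvR pf (c.1 * (pvColI maps).toNat + c.2)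
        = pvR pf (c.1 * (pvColI maps).toNat + c.2 + (pvColI maps).toNat))

theorem pvUFold (maps : List String) :
    ∀ (cs : List (Nat × Nat)) (p : List Nat),
    (∀ c ∈ cs, c.1 < maps.length ∧ c.2 < (pvColI maps).toNat) →
    pvInvB maps p →
    pvInvB maps (cs.foldl (pvStepU maps maps.length (pvColI maps).toNat) p) ∧
    (∀ x y, pvR p x = pvR p y →
      pvR (cs.foldl (pvStepU maps maps.length (pvColI maps).toNat) p) x
        = pvR (cs.foldl (pvStepU maps maps.length (pvColI maps).toNat) p) y) ∧
    (∀ c ∈ cs, c.1 < maps.length → c.2 < (pvColI maps).toNat →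
      pvCh maps c.1 c.2 ≠ 'X' →
      (c.2 + 1 < (pvColI maps).toNat → pvCh maps c.1 ((c.2 + 1 : Nat) : Int) ≠ 'X' →
        pvR (cs.foldl (pvStepU maps maps.length (pvColI maps).toNat) p)
            (c.1 * (pvColI maps).toNat + c.2)
          = pvR (cs.foldl (pvStepU maps maps.length (pvColI maps).toNat) p)
            (c.1 * (pvColI maps).toNat + c.2 + 1)) ∧
      (c.1 + 1 < maps.length → pvCh maps ((c.1 + 1 : Nat) : Int) c.2 ≠ 'X' →
        pvR (cs.foldl (pvStepU maps maps.length (pvColI maps).toNat) p)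
            (c.1 * (pvColI maps).toNat + c.2)
          = pvR (cs.foldl (pvStepU maps maps.length (pvColI maps).toNat) p)
            (c.1 * (pvColI maps).toNat + c.2 + (pvColI maps).toNat))) := by
  intro cs
  induction cs with
  | nil =>
      intro p _ hinv
      exact ⟨hinv, fun x y h => h, by simp⟩
  | cons c cs ih =>
      intro p hb hinv
      have hc := hb c (List.mem_cons_self ..)
      obtain ⟨hi, hm, hedge⟩ := pvStepU_char maps hinv hc.1 hc.2
      obtain ⟨hi', hm', hcl'⟩ := ih (pvStepU maps maps.length (pvColI maps).toNat p c)
        (fun x hx => hb x (List.mem_cons_of_mem _ hx)) hi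
      rw [List.foldl_cons]
      refine ⟨hi', fun x y h => hm' x y (hm x y h), ?_⟩
      intro d hd hd1 hd2 hdX
      rcases List.mem_cons.mp hd with rfl | hd
      · obtain ⟨hr, hdn⟩ := hedge hdX
        constructor
        · intro hbb hcc
          exact hm' _ _ (hr hbb hcc)
        · intro hbb hcc
          exact hm' _ _ (hdn hbb hcc)
      · exact hcl' d hd hd1 hd2 hdX

theorem pvInvB_init (maps : List String) :
    pvInvB maps (List.range (maps.length * (pvColI maps).toNat)) := by
  refine ⟨by simp, pvWf_range _, ?_, ?_⟩
  · intro x _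
    right
    exact pvR_range _ x
  · intro x y _ _ h
    rw [pvR_range, pvR_range] at h
    exact Or.inl h

-- any open adjacent pair ends up with equal roots
theorem pvEdge_any (maps : List String) (pf : List Nat) (he : pvEdges maps pf) :
    ∀ P Q : Int × Int, pvOpen maps P → pvOpen maps Q → Q ∈ pvNbrs P →
    pvR pf (P.1.toNat * (pvColI maps).toNat + P.2.toNat)
      = pvR pf (Q.1.toNat * (pvColI maps).toNat + Q.2.toNat) := by
  intro P Q hP hQ hadj
  obtain ⟨⟨hP1, hP2, hP3, hP4⟩, hPX⟩ := hP
  obtain ⟨⟨hQ1, hQ2, hQ3, hQ4⟩, hQX⟩ := hQ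
  have hcol0 := pvColI_nonneg maps
  have hPb1 : P.1.toNat < maps.length := by omega
  have hPb2 : P.2.toNat < (pvColI maps).toNat := by omega
  have hQb1 : Q.1.toNat < maps.length := by omega
  have hQb2 : Q.2.toNat < (pvColI maps).toNat := by omega
  have hPX' : pvCh maps ((P.1.toNat : Nat) : Int) ((P.2.toNat : Nat) : Int) ≠ 'X' := by
    rw [show ((P.1.toNat : Nat) : Int) = P.1 by omega, show ((P.2.toNat : Nat) : Int) = P.2 by omega]
    exact hPX
  have hQX' : pvCh maps ((Q.1.toNat : Nat) : Int) ((Q.2.toNat : Nat) : Int) ≠ 'X' := by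
    rw [show ((Q.1.toNat : Nat) : Int) = Q.1 by omega, show ((Q.2.toNat : Nat) : Int) = Q.2 by omega]
    exact hQX
  rcases (by simpa [pvNbrs, Prod.ext_iff] using hadj :
      (Q.1 = P.1 - 1 ∧ Q.2 = P.2) ∨ (Q.1 = P.1 + 1 ∧ Q.2 = P.2)
        ∨ (Q.1 = P.1 ∧ Q.2 = P.2 - 1) ∨ (Q.1 = P.1 ∧ Q.2 = P.2 + 1)) with
    ⟨h1, h2⟩ | ⟨h1, h2⟩ | ⟨h1, h2⟩ | ⟨h1, h2⟩
  · -- Q is above P: P is Q's down neighbour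
    have e1 : Q.1.toNat + 1 = P.1.toNat := by omega
    have e2 : Q.2.toNat = P.2.toNat := by omega
    have hhe := (he (Q.1.toNat, Q.2.toNat) hQb1 hQb2 hQX').2
      (by omega)
      (by rw [show ((Q.1.toNat + 1 : Nat) : Int) = P.1 by omega,
        show ((Q.2.toNat : Nat) : Int) = P.2 by omega]; exact hPX)
    dsimp only at hhe
    rw [hhe]
    congr 1
    have hx : (Q.1.toNat + 1) * (pvColI maps).toNat
        = Q.1.toNat * (pvColI maps).toNat + (pvColI maps).toNat := by ring
    rw [show P.1.toNat = Q.1.toNat + 1 by omega, show P.2.toNat = Q.2.toNat by omega]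
    omega
  · -- Q is below P
    have hhe := (he (P.1.toNat, P.2.toNat) hPb1 hPb2 hPX').2
      (by omega)
      (by rw [show ((P.1.toNat + 1 : Nat) : Int) = Q.1 by omega,
        show ((P.2.toNat : Nat) : Int) = Q.2 by omega]; exact hQX)
    dsimp only at hhe
    rw [hhe]
    congr 1
    have hx : (P.1.toNat + 1) * (pvColI maps).toNat
        = P.1.toNat * (pvColI maps).toNat + (pvColI maps).toNat := by ring
    rw [show Q.1.toNat = P.1.toNat + 1 by omega, show Q.2.toNat = P.2.toNat by omega]
    omega
  · -- Q is left of P: P is Q's right neighbour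
    have hhe := (he (Q.1.toNat, Q.2.toNat) hQb1 hQb2 hQX').1
      (by omega)
      (by rw [show ((Q.2.toNat + 1 : Nat) : Int) = P.2 by omega]
          rw [show ((Q.1.toNat : Nat) : Int) = P.1 by omega]
          exact hPX)
    dsimp only at hhe
    rw [hhe]
    congr 1
    rw [show P.1.toNat = Q.1.toNat by omega, show P.2.toNat = Q.2.toNat + 1 by omega]
    omega
  · -- Q is right of P
    have hhe := (he (P.1.toNat, P.2.toNat) hPb1 hPb2 hPX').1
      (by omega)
      (by rw [show ((P.2.toNat + 1 : Nat) : Int) = Q.2 by omega]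
          rw [show ((P.1.toNat : Nat) : Int) = Q.1 by omega]
          exact hQX)
    dsimp only at hhe
    rw [hhe]
    congr 1
    rw [show Q.1.toNat = P.1.toNat by omega, show Q.2.toNat = P.2.toNat + 1 by omega]
    omega

theorem pvConn_roots (maps : List String) (pf : List Nat) (he : pvEdges maps pf) :
    ∀ P Q : Int × Int, pvConn maps P Q →
    pvR pf (P.1.toNat * (pvColI maps).toNat + P.2.toNat)
      = pvR pf (Q.1.toNat * (pvColI maps).toNat + Q.2.toNat) := by
  intro P Q h
  induction h with
  | refl _ => rfl
  | step z y hz hy ho ih =>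
      exact ih.trans (pvEdge_any maps pf he z y (pvConn_open_right hz) ho hy)

theorem pvToI_toN {P : Int × Int} (h1 : 0 ≤ P.1) (h2 : 0 ≤ P.2) :
    pvToI (P.1.toNat, P.2.toNat) = P := by
  obtain ⟨a, b⟩ := P
  simp [pvToI, Prod.ext_iff]
  omega

theorem pvRoots_conn (maps : List String) (pf : List Nat) (hinv : pvInvB maps pf) :
    ∀ P Q : Int × Int, pvOpen maps P → pvOpen maps Q →
    pvR pf (P.1.toNat * (pvColI maps).toNat + P.2.toNat)
      = pvR pf (Q.1.toNat * (pvColI maps).toNat + Q.2.toNat) →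
    pvConn maps P Q := by
  intro P Q hP hQ hroot
  obtain ⟨⟨hP1, hP2, hP3, hP4⟩, hPX⟩ := hP
  obtain ⟨⟨hQ1, hQ2, hQ3, hQ4⟩, hQX⟩ := hQ
  have hcol0 := pvColI_nonneg maps
  have hPb1 : P.1.toNat < maps.length := by omega
  have hPb2 : P.2.toNat < (pvColI maps).toNat := by omega
  have hQb1 : Q.1.toNat < maps.length := by omega
  have hQb2 : Q.2.toNat < (pvColI maps).toNat := by omega
  have hxl : P.1.toNat * (pvColI maps).toNat + P.2.toNat < pf.length := by
    rw [hinv.1]; exact pvIdx_lt (c := (P.1.toNat, P.2.toNat)) hPb1 hPb2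
  have hyl : Q.1.toNat * (pvColI maps).toNat + Q.2.toNat < pf.length := by
    rw [hinv.1]; exact pvIdx_lt (c := (Q.1.toNat, Q.2.toNat)) hQb1 hQb2
  have hcellP : pvCellI maps (P.1.toNat * (pvColI maps).toNat + P.2.toNat) = P := by
    rw [pvCellI_idx (c := (P.1.toNat, P.2.toNat)) hPb2]
    exact pvToI_toN hP1 hP3
  have hcellQ : pvCellI maps (Q.1.toNat * (pvColI maps).toNat + Q.2.toNat) = Q := by
    rw [pvCellI_idx (c := (Q.1.toNat, Q.2.toNat)) hQb2]
    exact pvToI_toN hQ1 hQ3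
  rcases hinv.2.2.2 _ _ hxl hyl hroot with heq | hconn
  · have hPQ : P = Q := by
      obtain ⟨hd, hm⟩ := pvIdx_decomp (c := (P.1.toNat, P.2.toNat)) hPb2
      obtain ⟨hd', hm'⟩ := pvIdx_decomp (c := (Q.1.toNat, Q.2.toNat)) hQb2
      rw [heq] at hd hm
      obtain ⟨a, b⟩ := P; obtain ⟨a', b'⟩ := Q
      simp only [Prod.ext_iff]
      simp only at hd hm hd' hm' hP1 hP3 hQ1 hQ3
      constructor <;> omega
    rw [hPQ]
    exact pvConn.refl ⟨⟨hQ1, hQ2, hQ3, hQ4⟩, hQX⟩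
  · rw [hcellP, hcellQ] at hconn
    exact hconn


-- ---------- B's sum scan ----------
def pvStepD (maps : List String) (colN : Nat) (pf : List Nat)
    (d : PySem.Dict Nat Int) (c : Nat × Nat) : PySem.Dict Nat Int :=
  if pvCh maps c.1 c.2 = 'X' then d
  else
    let r := pvFind pf pf.length (c.1 * colN + c.2)
    d.insert r (d.getD r 0 + pvDig maps c.1 c.2)

theorem pvSumScan_eq (maps : List String) (rowN colN : Nat) (pf : List Nat) :
    pvSumScan maps rowN colN pf
      = (pvCellsN rowN colN).foldl (pvStepD maps colN pf) PySem.Dict.empty := by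
  show (List.range rowN).foldl (fun d i =>
      (List.range colN).foldl (fun d j => pvStepD maps colN pf d (i, j)) d)
      PySem.Dict.empty = _
  rw [pvFoldlNest (List.range rowN) (List.range colN)
    (fun d i j => pvStepD maps colN pf d (i, j)) PySem.Dict.empty]
  rfl

-- grouping: the per-key running sums a dict-insert loop builds
theorem pvGroupFold (key : (Nat × Nat) → Nat) (w : (Nat × Nat) → Int) :
    ∀ (xs : List (Nat × Nat)) (d : PySem.Dict Nat Int) (k : Nat),
    (xs.foldl (fun d x => d.insert (key x) (d.getD (key x) 0 + w x)) d).getD k 0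
      = d.getD k 0 + ((xs.filter (fun x => key x == k)).map w).sum := by
  intro xs
  induction xs with
  | nil => simp
  | cons x xs ih =>
      intro d k
      rw [List.foldl_cons, ih]
      by_cases h : key x = k
      · rw [List.filter_cons_of_pos (by simpa using h)]
        rw [PySem.Dict.getD_insert, if_pos h.symm]
        subst h
        simp only [List.map_cons, List.sum_cons]
        omega
      · rw [List.filter_cons_of_neg (by simpa using h)]
        rw [PySem.Dict.getD_insert, if_neg (fun ww => h ww.symm)]

theorem pvPairwiseNe {maps : List String} {S : List (Int × Int)} (g : Int × Int → Nat)
    (hSopen : ∀ s ∈ S, pvOpen maps s)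
    (hSpw : S.Pairwise (fun a b => ¬ pvConn maps a b))
    (hinj : ∀ a b, pvOpen maps a → pvOpen maps b → g a = g b → pvConn maps a b) :
    (S.map g).Nodup := by
  have hpw : S.Pairwise (fun a b => g a ≠ g b) :=
    hSpw.imp_of_mem (fun {a b} ha hb hR heq =>
      hR (hinj a b (hSopen a ha) (hSopen b hb) heq))
  exact List.pairwise_map.mpr hpw


-- the open scanned cells, B's grouping key (final root) and weight (digit value)
def pvOc (maps : List String) : List (Nat × Nat) :=
  (pvCellsN maps.length (pvColI maps).toNat).filter
    (fun c => decide (pvCh maps (c.1 : Int) (c.2 : Int) ≠ 'X'))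

def pvKey (maps : List String) (pf : List Nat) (c : Nat × Nat) : Nat :=
  pvR pf (c.1 * (pvColI maps).toNat + c.2)

def pvW (maps : List String) (c : Nat × Nat) : Int := pvDig maps (c.1 : Int) (c.2 : Int)

def pvG (maps : List String) (pf : List Nat) (P : Int × Int) : Nat :=
  pvR pf (P.1.toNat * (pvColI maps).toNat + P.2.toNat)

theorem pvOc_mem {maps : List String} {c : Nat × Nat} :
    c ∈ pvOc maps ↔ c.1 < maps.length ∧ c.2 < (pvColI maps).toNat
      ∧ pvCh maps (c.1 : Int) (c.2 : Int) ≠ 'X' := by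
  rw [pvOc, List.mem_filter, pvMem_cellsN]
  simp [and_assoc]

theorem pvOc_nodup (maps : List String) : (pvOc maps).Nodup :=
  (pvCellsN_nodup _ _).filter _

theorem pvDfold (maps : List String) (pf : List Nat) (hinv : pvInvB maps pf) :
    pvSumScan maps maps.length (pvColI maps).toNat pf
      = (pvOc maps).foldl (fun d c =>
          d.insert (pvKey maps pf c) (d.getD (pvKey maps pf c) 0 + pvW maps c))
          PySem.Dict.empty := by
  rw [pvSumScan_eq]
  have h1 : (pvCellsN maps.length (pvColI maps).toNat).foldl
      (pvStepD maps (pvColI maps).toNat pf) PySem.Dict.empty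
      = (pvCellsN maps.length (pvColI maps).toNat).foldl (fun d c =>
          if pvCh maps (c.1 : Int) (c.2 : Int) ≠ 'X'
          then d.insert (pvFind pf pf.length (c.1 * (pvColI maps).toNat + c.2))
            (d.getD (pvFind pf pf.length (c.1 * (pvColI maps).toNat + c.2)) 0
              + pvDig maps (c.1 : Int) (c.2 : Int))
          else d) PySem.Dict.empty := by
    apply PySem.List.foldl_congr_mem
    intro acc x hx
    by_cases h : pvCh maps (x.1 : Int) (x.2 : Int) = 'X' <;> simp [pvStepD, h]
  rw [h1, PySem.List.foldl_ite_eq_foldl_filter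
    (p := fun c : Nat × Nat => pvCh maps (c.1 : Int) (c.2 : Int) ≠ 'X')]
  apply PySem.List.foldl_congr_mem
  intro acc x hx
  have hxm := pvOc_mem.mp hx
  have hfind : pvFind pf pf.length (x.1 * (pvColI maps).toNat + x.2)
      = pvR pf (x.1 * (pvColI maps).toNat + x.2) :=
    pvFind_stable pf hinv.2.1 _ _ (by rw [hinv.1]; exact pvIdx_lt hxm.1 hxm.2.1)
  rw [hfind]
  rfl

theorem pvKeys (maps : List String) (pf : List Nat) (hinv : pvInvB maps pf) :
    (pvSumScan maps maps.length (pvColI maps).toNat pf).keys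
      = PySem.Set.ofList ((pvOc maps).map (pvKey maps pf)) := by
  rw [pvDfold maps pf hinv,
    PySem.Dict.keys_foldl_insert_key (pvOc maps) (pvKey maps pf)
      (fun d c => d.getD (pvKey maps pf c) 0 + pvW maps c) PySem.Dict.empty,
    PySem.Dict.keys_empty]
  rfl

theorem pvNodupKeys (maps : List String) (pf : List Nat) (hinv : pvInvB maps pf) :
    (pvSumScan maps maps.length (pvColI maps).toNat pf).keys.Nodup := by
  rw [pvDfold maps pf hinv]
  exact PySem.Dict.nodup_keys_foldl_insert_key (pvOc maps) (pvKey maps pf) _ PySem.Dict.empty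
    (by rw [PySem.Dict.keys_empty]; exact List.nodup_nil)

theorem pvGetD (maps : List String) (pf : List Nat) (hinv : pvInvB maps pf) (k : Nat) :
    (pvSumScan maps maps.length (pvColI maps).toNat pf).getD k 0
      = (((pvOc maps).filter (fun c => pvKey maps pf c == k)).map (pvW maps)).sum := by
  rw [pvDfold maps pf hinv, pvGroupFold (pvKey maps pf) (pvW maps) (pvOc maps) PySem.Dict.empty k]
  simp [PySem.Dict.getD_empty]

theorem pvBSide (maps : List String) (pf : List Nat)
    (hinv : pvInvB maps pf) (he : pvEdges maps pf)
    (S : List (Int × Int))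
    (hSopen : ∀ s ∈ S, pvOpen maps s)
    (hSpw : S.Pairwise (fun a b => ¬ pvConn maps a b))
    (hScov : ∀ p, pvOpen maps p ↔ ∃ s ∈ S, pvConn maps s p) :
    (pvSumScan maps maps.length (pvColI maps).toNat pf).values.Perm (S.map (pvCompSum maps)) ∧
    ((pvSumScan maps maps.length (pvColI maps).toNat pf).size = 0 ↔ S = []) := by
  have hCR : ∀ P Q, pvConn maps P Q → pvG maps pf P = pvG maps pf Q :=
    fun P Q h => pvConn_roots maps pf he P Q h
  have hRC : ∀ P Q, pvOpen maps P → pvOpen maps Q →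
      pvG maps pf P = pvG maps pf Q → pvConn maps P Q :=
    fun P Q hP hQ h => pvRoots_conn maps pf hinv P Q hP hQ h
  have hkeyg : ∀ c : Nat × Nat, pvKey maps pf c = pvG maps pf (pvToI c) := by
    intro c
    simp [pvKey, pvG, pvToI]
  have hopenoc : ∀ c ∈ pvOc maps, pvOpen maps (pvToI c) := by
    intro c hc
    obtain ⟨h1, h2, h3⟩ := pvOc_mem.mp hc
    exact (pvOpenN_iff h1 h2).mpr h3
  have htoN : ∀ s : Int × Int, pvOpen maps s →
      (s.1.toNat, s.2.toNat) ∈ pvOc maps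
      ∧ pvKey maps pf (s.1.toNat, s.2.toNat) = pvG maps pf s := by
    intro s hs
    obtain ⟨⟨h1, h2, h3, h4⟩, hX⟩ := hs
    have hcol0 := pvColI_nonneg maps
    refine ⟨pvOc_mem.mpr ⟨by omega, by omega, ?_⟩, rfl⟩
    rw [show ((s.1.toNat : Nat) : Int) = s.1 by omega,
      show ((s.2.toNat : Nat) : Int) = s.2 by omega]
    exact hX
  have hKmem : ∀ k, k ∈ PySem.Set.ofList ((pvOc maps).map (pvKey maps pf))
      ↔ k ∈ S.map (pvG maps pf) := by
    intro k
    rw [PySem.Set.mem_ofList, List.mem_map]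
    constructor
    · rintro ⟨c, hc, rfl⟩
      obtain ⟨sx, hsS, hconn⟩ := (hScov (pvToI c)).mp (hopenoc c hc)
      refine List.mem_map.mpr ⟨sx, hsS, ?_⟩
      rw [hkeyg c]
      exact hCR sx (pvToI c) hconn
    · intro hk
      obtain ⟨sx, hsS, rfl⟩ := List.mem_map.mp hk
      obtain ⟨hmem, hkey⟩ := htoN sx (hSopen sx hsS)
      exact ⟨_, hmem, hkey⟩
  have hperm : (PySem.Set.ofList ((pvOc maps).map (pvKey maps pf))).Perm
      (S.map (pvG maps pf)) := by
    refine (List.perm_ext_iff_of_nodup (PySem.Set.nodup_ofList _) ?_).mpr hKmem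
    exact pvPairwiseNe (pvG maps pf) hSopen hSpw (fun a b ha hb h => hRC a b ha hb h)
  have hpoint : ∀ s ∈ S,
      (((pvOc maps).filter (fun c => pvKey maps pf c == pvG maps pf s)).map (pvW maps)).sum
        = pvCompSum maps s := by
    intro s hsS
    have hsop := hSopen s hsS
    have hFLnd : ((pvOc maps).filter (fun c => pvKey maps pf c == pvG maps pf s)).Nodup :=
      (pvOc_nodup maps).filter _
    have hFInd : (((pvOc maps).filter (fun c => pvKey maps pf c == pvG maps pf s)).map pvToI).Nodup :=
      hFLnd.map pvToI_inj
    have hFImem : ∀ P, P ∈ ((pvOc maps).filter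
        (fun c => pvKey maps pf c == pvG maps pf s)).map pvToI ↔ pvConn maps s P := by
      intro P
      rw [List.mem_map]
      constructor
      · rintro ⟨c, hc, rfl⟩
        obtain ⟨hcoc, hck⟩ := List.mem_filter.mp hc
        have hck' : pvKey maps pf c = pvG maps pf s := by simpa using hck
        apply pvConn_symm
        apply hRC (pvToI c) s (hopenoc c hcoc) hsop
        rw [← hkeyg c, hck']
      · intro hconn
        have hop := pvConn_open_right hconn
        obtain ⟨hmem, hkey⟩ := htoN P hop
        refine ⟨(P.1.toNat, P.2.toNat), List.mem_filter.mpr ⟨hmem, ?_⟩, ?_⟩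
        · simp only [beq_iff_eq]
          rw [hkey]
          exact (hCR s P hconn).symm
        · exact pvToI_toN hop.1.1 hop.1.2.2.1
    have hfs : pvCompF maps s
        = (((pvOc maps).filter (fun c => pvKey maps pf c == pvG maps pf s)).map pvToI).toFinset := by
      apply Finset.ext
      intro P
      rw [pvMem_compF, List.mem_toFinset, hFImem]
    calc (((pvOc maps).filter (fun c => pvKey maps pf c == pvG maps pf s)).map (pvW maps)).sum
        = ((((pvOc maps).filter (fun c => pvKey maps pf c == pvG maps pf s)).map pvToI).map
            (pvDval maps)).sum := by
          rw [List.map_map]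
          apply congrArg List.sum
          apply List.map_congr_left
          intro c _
          simp [pvW, pvDval, pvToI]
      _ = ∑ P ∈ (((pvOc maps).filter (fun c => pvKey maps pf c == pvG maps pf s)).map pvToI).toFinset,
            pvDval maps P := (List.sum_toFinset (pvDval maps) hFInd).symm
      _ = pvCompSum maps s := by
          rw [← hfs]
          rfl
  have hvals : (pvSumScan maps maps.length (pvColI maps).toNat pf).values
      = (PySem.Set.ofList ((pvOc maps).map (pvKey maps pf))).map
          (fun k => (((pvOc maps).filter (fun c => pvKey maps pf c == k)).map (pvW maps)).sum) := by
    rw [PySem.Dict.values_eq_map_keys _ (pvNodupKeys maps pf hinv) 0, pvKeys maps pf hinv]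
    apply List.map_congr_left
    intro k _
    exact pvGetD maps pf hinv k
  constructor
  · rw [hvals]
    have h2 : S.map (pvCompSum maps) = (S.map (pvG maps pf)).map
        (fun k => (((pvOc maps).filter (fun c => pvKey maps pf c == k)).map (pvW maps)).sum) := by
      rw [List.map_map]
      apply (List.map_congr_left ?_).symm
      intro sx hs
      exact hpoint sx hs
    rw [h2]
    exact hperm.map _
  · have hsz : (pvSumScan maps maps.length (pvColI maps).toNat pf).size
        = (pvSumScan maps maps.length (pvColI maps).toNat pf).keys.length := by
      simp [PySem.Dict.keys, PySem.Dict.size]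
    rw [hsz, pvKeys maps pf hinv]
    have hl := hperm.length_eq
    rw [List.length_map] at hl
    constructor
    · intro h
      have hS0 : S.length = 0 := by omega
      exact List.length_eq_zero_iff.mp hS0
    · intro h
      subst h
      simpa using hl

theorem pvMain (s0 : String) (t : List String) :
    solution (s0 :: t) = solution_alt (s0 :: t) := by
  obtain ⟨S, hSopen, hSpw, hScov, hAeq⟩ := pvA_char s0 t
  have hBdef : solution_alt (s0 :: t)
      = (if (pvSumScan (s0 :: t) (s0 :: t).length (pvColI (s0 :: t)).toNat
            (pvUnionScan (s0 :: t) (s0 :: t).length (pvColI (s0 :: t)).toNat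
              (List.range ((s0 :: t).length * (pvColI (s0 :: t)).toNat)))).size = 0
        then [-1]
        else PySem.List.sorted (pvSumScan (s0 :: t) (s0 :: t).length (pvColI (s0 :: t)).toNat
            (pvUnionScan (s0 :: t) (s0 :: t).length (pvColI (s0 :: t)).toNat
              (List.range ((s0 :: t).length * (pvColI (s0 :: t)).toNat)))).values
            (fun x => x) false) := rfl
  rw [hAeq, hBdef, pvUnionScan_eq]
  obtain ⟨hinv, -, hcl⟩ := pvUFold (s0 :: t)
    (pvCellsN (s0 :: t).length (pvColI (s0 :: t)).toNat)
    (List.range ((s0 :: t).length * (pvColI (s0 :: t)).toNat))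
    (fun c hc => pvMem_cellsN.mp hc) (pvInvB_init (s0 :: t))
  have he : pvEdges (s0 :: t)
      ((pvCellsN (s0 :: t).length (pvColI (s0 :: t)).toNat).foldl
        (pvStepU (s0 :: t) (s0 :: t).length (pvColI (s0 :: t)).toNat)
        (List.range ((s0 :: t).length * (pvColI (s0 :: t)).toNat))) := by
    intro c hc1 hc2 hX
    exact hcl c (pvMem_cellsN.mpr ⟨hc1, hc2⟩) hc1 hc2 hX
  obtain ⟨hperm, hemp⟩ := pvBSide (s0 :: t) _ hinv he S hSopen hSpw hScov
  by_cases hS : S = []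
  · rw [if_pos hS, if_pos (hemp.mpr hS)]
  · rw [if_neg hS, if_neg (fun w => hS (hemp.mp w))]
    exact (PySem.List.sorted_id_eq_sorted_id_iff_perm _ _).mpr hperm.symm

-- ===== VERDICT (by name: the statement is the Claim_ definition above) =====
theorem solution_spec : Claim_equal_solution := by
  intro maps _hdom hpre
  unfold Spec_solution
  cases maps with
  | nil => exact absurd rfl hpre.1
  | cons s0 t => exact pvMain s0 t
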